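-- pv_equiv track=rewrite | github.com/Florent-V/Advent-Of-Code | aoc_2023/Day_14/other_approach.py | part_2
-- ===== SOURCE A (Python) =====
-- from itertools import count
--
-- def matrix_shape(matrix):
--   return len(matrix), len(matrix[0])
--
-- def roll(grid, H, W):
--     target = dict(grid)
--     for x in range(W):
--         stop = 0
--         for y in range(H):
--             match grid[x, y]:
--                 case "#":
--                     stop = y + 1
--                 case "O":
--                     if y > stop:
--                         target[x, y] = "."
--                         target[x, stop] = "O"
--                     stop += 1
--     return target
--
-- def get_load(grid, H, W):
--     load = 0
--     for x in range(W):
--         for y in range(H):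
--             if grid[x, y] == "O":
--                 load += H - y
--     return load
--
-- def rotate(grid, H):
--     return {(H - y - 1, x): c for (x, y), c in grid.items()}
--
-- def part_2(lines):
--     H, W = matrix_shape(lines)
--     grid = {(x, y): c for y, line in enumerate(lines) for x, c in enumerate(line)}
--     states = [grid]
--     for i in count(1):
--         grid = roll(grid, H, W)  # north
--         grid = rotate(grid, H)
--         grid = roll(grid, W, H)  # west
--         grid = rotate(grid, W)
--         grid = roll(grid, H, W)  # south
--         grid = rotate(grid, H)
--         grid = roll(grid, W, H)  # east
--         grid = rotate(grid, W)
--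
--         if grid in states:
--             j = states.index(grid)  # loop found
--             k = (1000000000 - j) % (i - j) + j
--             return get_load(states[k], H, W)
--
--         states.append(grid)
-- ===== SOURCE B (Python) =====
-- def tilt(row):
--     # within each '#'-delimited segment the 'O's pile up at the low end;
--     # anything else keeps its place unless an 'O' settles on it
--     parts = []
--     for seg in row.split('#'):
--         m = seg.count('O')
--         parts.append('O' * m + seg[m:].replace('O', '.'))
--     return '#'.join(parts)
--
--
-- def spin(g):
--     # one full N,W,S,E cycle: tilt every column north, rotate clockwise, four times
--     for _ in range(4):
--         g = tuple(tilt(''.join(col))[::-1] for col in zip(*g))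
--     return g
--
--
-- def part_2(lines):
--     H = len(lines)
--     W = len(lines[0])
--     g0 = tuple(line[:W] for line in lines)  # the grid is as wide as its first row
--     seen = {}
--     g, i = g0, 0
--     while g not in seen:
--         seen[g] = i
--         g = spin(g)
--         i += 1
--     j = seen[g]
--     k = (1000000000 - j) % (i - j) + j
--     g = g0
--     for _ in range(k):
--         g = spin(g)
--     return sum((H - y) * row.count('O') for y, row in enumerate(g))
-- ===== Notes on version B (the rewrite author's own statement) =====
-- stated objective: faster
-- what changed: B replaces A's coordinate-dict simulation (per-cell dict reads and in-place swap writes, dict-comprehension rotations, linear `grid in states` search, stored state list) by row strings whose tilt splits each line on '#' and rebuilds every fragment as a counted block of 'O's plus the swept remainder, transposition-based rotation, a hash map over seen grids for O(1) repeat detection, and a replay of spin cycles from the start instead of storing all states.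
import Mathlib
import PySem

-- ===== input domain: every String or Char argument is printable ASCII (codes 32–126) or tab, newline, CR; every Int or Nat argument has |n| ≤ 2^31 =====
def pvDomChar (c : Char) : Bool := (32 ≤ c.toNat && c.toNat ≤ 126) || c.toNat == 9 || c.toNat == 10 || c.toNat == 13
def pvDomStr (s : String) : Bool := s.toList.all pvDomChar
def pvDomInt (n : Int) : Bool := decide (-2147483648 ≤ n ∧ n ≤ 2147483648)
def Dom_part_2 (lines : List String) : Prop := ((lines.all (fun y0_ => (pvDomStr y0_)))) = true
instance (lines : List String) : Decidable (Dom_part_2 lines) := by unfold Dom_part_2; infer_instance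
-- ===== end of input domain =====

-- B replaces A's coordinate-dict simulation by row strings: each tilt splits every line on '#'
-- and rebuilds each fragment as a block of 'O's followed by the swept remainder, the grid is
-- rotated by transposition, repeats are found through a hash map of seen grids, and the state
-- at the extrapolated index is recomputed by replaying spin cycles from the start instead of
-- keeping a list of all states; return value unchanged.

-- ===== PORT A =====
-- Port notes: grid cells (Python 1-character strings) are ported as Char; `grid[x, y]` is ported
-- as `Dict.getD _ _ ' '` — exact on every input admitted by Pre_part_2, where each read key is
-- present; Python's unbounded `for i in count(1)` is ported with a large fuel, a pure totality
-- guard (the loop returns at the first repeated state); Python's order-insensitive dict `==`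
-- used by `grid in states` / `states.index(grid)` is ported as pyDictEqA.

def rollA (grid : PySem.Dict (Int × Int) Char) (H W : Int) : PySem.Dict (Int × Int) Char :=
  (PySem.List.pyRange 0 W).foldl
    (fun target x =>
      ((PySem.List.pyRange 0 H).foldl
        (fun (st : PySem.Dict (Int × Int) Char × Int) y =>
          let c := grid.getD (x, y) ' '
          if c = '#' then (st.1, y + 1)
          else if c = 'O' then
            (if y > st.2 then (st.1.insert (x, y) '.').insert (x, st.2) 'O' else st.1, st.2 + 1)
          else st)
        (target, 0)).1)
    grid

def getLoadA (grid : PySem.Dict (Int × Int) Char) (H W : Int) : Int :=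
  (PySem.List.pyRange 0 W).foldl
    (fun load x =>
      (PySem.List.pyRange 0 H).foldl
        (fun load y => if grid.getD (x, y) ' ' = 'O' then load + (H - y) else load)
        load)
    0

def rotateA (grid : PySem.Dict (Int × Int) Char) (H : Int) : PySem.Dict (Int × Int) Char :=
  grid.items.foldl (fun d p => d.insert (H - p.1.2 - 1, p.1.1) p.2) PySem.Dict.empty

def cycleA (H W : Int) (grid : PySem.Dict (Int × Int) Char) : PySem.Dict (Int × Int) Char :=
  rotateA (rollA (rotateA (rollA (rotateA (rollA (rotateA (rollA grid H W) H) W H) W) H W) H) W H) W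

def pyDictEqA (d1 d2 : PySem.Dict (Int × Int) Char) : Bool :=
  d1.size == d2.size && d1.items.all (fun p => d2.get? p.1 == some p.2)

def indexA (g : PySem.Dict (Int × Int) Char) :
    List (PySem.Dict (Int × Int) Char) → Option Int
  | [] => none
  | d :: rest => if pyDictEqA g d then some 0 else (indexA g rest).map (· + 1)

def loopA (fuel : Nat) (i H W : Int) (states : List (PySem.Dict (Int × Int) Char))
    (grid : PySem.Dict (Int × Int) Char) : Int :=
  match fuel with
  | 0 => 0
  | f + 1 =>
    let g := cycleA H W grid
    match indexA g states with
    | some j =>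
        getLoadA (PySem.List.pyGetD states (PySem.Int.mod (1000000000 - j) (i - j) + j)
          PySem.Dict.empty) H W
    | none => loopA f (i + 1) H W (states ++ [g]) g

def part_2 (lines : List String) : Int :=
  let H : Int := lines.length
  let W : Int := PySem.Str.len (PySem.List.pyGetD lines 0 "")
  let grid := (PySem.List.enumerate lines).foldl
    (fun d yl =>
      (PySem.List.enumerate yl.2.toList).foldl (fun d xc => d.insert (xc.1, yl.1) xc.2) d)
    PySem.Dict.empty
  loopA 1000000000 1 H W [grid] grid

-- ===== PORT B =====
-- Port notes: Python row strings are ported on the code-point side as List Char (every string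
-- operation is its PySem.Chars form: split → splitOn, count → count, replace → replace, join →
-- join, [m:] → slice, [::-1] → reverse per PySem.List.slice?_none_none_neg_one); `zip(*g)` is
-- zipStarGo (its fuel argument, the first row's length, is a pure totality bound: zip stops at
-- the shortest row); the `while` loop is ported with a large fuel, as A's loop is.

def resettleP (seg : List Char) : List Char :=
  let m := PySem.Chars.count seg ['O']
  List.replicate m 'O' ++
    PySem.Chars.replace (PySem.List.slice seg (some (m : Int)) none) ['O'] ['.']

def tiltP (row : List Char) : List Char :=
  PySem.Chars.join ['#'] ((PySem.Chars.splitOn row ['#']).map resettleP)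

def zipStarGo (fuel : Nat) (rows : List (List Char)) : List (List Char) :=
  match fuel with
  | 0 => []
  | f + 1 =>
    if rows.isEmpty || rows.any List.isEmpty then []
    else (rows.map (fun r => r.headD ' ')) :: zipStarGo f (rows.map List.tail)

def zipStarB (rows : List (List Char)) : List (List Char) :=
  zipStarGo (rows.headD []).length rows

def spinP (g : List (List Char)) : List (List Char) :=
  (PySem.List.pyRange 0 4).foldl
    (fun g _ => (zipStarB g).map (fun col => (tiltP col).reverse)) g

def loadP (H : Int) (g : List (List Char)) : Int :=
  ((PySem.List.enumerate g).map
    (fun yr => (H - yr.1) * (PySem.Chars.count yr.2 ['O'] : Int))).sum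

def loopP (fuel : Nat) (i : Int) (seen : PySem.Dict (List (List Char)) Int)
    (g g0 : List (List Char)) (H : Int) : Int :=
  match fuel with
  | 0 => 0
  | f + 1 =>
    match seen.get? g with
    | some j =>
        let k := PySem.Int.mod (1000000000 - j) (i - j) + j
        loadP H ((PySem.List.pyRange 0 k).foldl (fun g _ => spinP g) g0)
    | none => loopP f (i + 1) (seen.insert g i) (spinP g) g0 H

def part_2_alt (lines : List String) : Int :=
  let H : Int := lines.length
  let W : Int := PySem.Str.len (PySem.List.pyGetD lines 0 "")
  let g0 := lines.map (fun line => PySem.List.slice line.toList none (some W))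
  loopP 1000000001 0 PySem.Dict.empty g0 g0 H

-- ===== PRECONDITION & SPEC =====
-- Pre_part_2 excludes exactly the inputs on which A raises: the empty list (IndexError at
-- lines[0]) and inputs where some row is shorter than the first (KeyError in roll); on every
-- other input A returns and the claim applies.
def Pre_part_2 (lines : List String) : Prop :=
  lines ≠ [] ∧ ∀ l ∈ lines, PySem.Str.len (lines.headD "") ≤ PySem.Str.len l
instance (lines : List String) : Decidable (Pre_part_2 lines) := by
  unfold Pre_part_2; infer_instance

def pvWitness_part_2 : List String := ["O#", ".O"]

def Spec_part_2 (lines : List String) (out : Int) : Prop := out = part_2_alt lines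
instance (lines : List String) (out : Int) : Decidable (Spec_part_2 lines out) := by
  unfold Spec_part_2; infer_instance

-- ===== CLAIM (what is proved, stated in full; the proofs are below) =====
def Claim_equal_part_2 : Prop :=
  ∀ (lines : List String), Dom_part_2 lines → Pre_part_2 lines →
    Spec_part_2 lines (part_2 lines)

-- ===== LEMMAS AND PROOFS =====

/-- Column `x` of a grid of row lists. -/
def colG (g : List (List Char)) (x : Nat) : List Char := g.map (fun r => r.getD x ' ')

/-- What the coordinate dict stores at `(x, y)`, read off the row-list grid. -/
def cellO (g : List (List Char)) (x y : Int) : Option Char :=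
  if 0 ≤ x ∧ 0 ≤ y then (g[y.toNat]?).bind (fun r => r[x.toNat]?) else none

/-- A-side dict `d` represents B-side grid `g` on the `Wn × Hn` box and carries the fixed
out-of-box phantom content `φ` (cells of rows longer than the first, which A's dict drags
along unchanged through every spin cycle). -/
def InvD (d : PySem.Dict (Int × Int) Char) (g : List (List Char))
    (φ : Int × Int → Option Char) (Wn Hn : Nat) : Prop :=
  d.keys.Nodup ∧ ∀ x y : Int, d.get? (x, y) =
    if 0 ≤ x ∧ x < (Wn : Int) ∧ 0 ≤ y ∧ y < (Hn : Int) then cellO g x y else φ (x, y)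

/-- `g` is a rectangular `Hn × Wn` grid. -/
def RectG (g : List (List Char)) (Hn Wn : Nat) : Prop :=
  g.length = Hn ∧ ∀ r ∈ g, r.length = Wn

/-- One step of the landing-slot scan describing where A's roll puts each 'O'. -/
def scanStepL (p : List Int × Int) (yc : Int × Char) : List Int × Int :=
  if yc.2 = '#' then (p.1, yc.1 + 1)
  else if yc.2 = 'O' then (p.1 ++ [p.2], p.2 + 1)
  else p

def scanL (cs : List Char) (s : Int) (stop : Int) : List Int × Int :=
  (PySem.List.enumerate cs s).foldl scanStepL ([], stop)

def landsOf (cs : List Char) : List Int := (scanL cs 0 0).1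

/-- A's inner roll loop body for column `x`, reading the (already looked-up) cell. -/
def stepA (x : Int) (st : PySem.Dict (Int × Int) Char × Int) (yc : Int × Char) :
    PySem.Dict (Int × Int) Char × Int :=
  if yc.2 = '#' then (st.1, yc.1 + 1)
  else if yc.2 = 'O' then
    (if yc.1 > st.2 then (st.1.insert (x, yc.1) '.').insert (x, st.2) 'O' else st.1, st.2 + 1)
  else st

theorem get?_eq_find {κ ν : Type} [BEq κ] (d : PySem.Dict κ ν) (k : κ) :
    d.get? k = (d.items.find? (fun p => p.1 == k)).map (fun p => p.2) := rfl

theorem scanL_append (cs : List Char) : ∀ (s : Int) (l : List Int) (stop : Int),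
    (PySem.List.enumerate cs s).foldl scanStepL (l, stop) =
      (l ++ (scanL cs s stop).1, (scanL cs s stop).2) := by
  induction cs with
  | nil => intro s l stop; simp [scanL, PySem.List.enumerate_nil]
  | cons c cs ih =>
    intro s l stop
    simp only [scanL, PySem.List.enumerate_cons, List.foldl_cons]
    by_cases h1 : c = '#'
    · have e1 : scanStepL (l, stop) (s, c) = (l, s + 1) := by simp [scanStepL, h1]
      have e2 : scanStepL ([], stop) (s, c) = ([], s + 1) := by simp [scanStepL, h1]
      rw [e1, e2]
      simpa [scanL] using ih (s + 1) l (s + 1)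
    · by_cases h2 : c = 'O'
      · have e1 : scanStepL (l, stop) (s, c) = (l ++ [stop], stop + 1) := by
          simp [scanStepL, h1, h2]
        have e2 : scanStepL ([], stop) (s, c) = ([stop], stop + 1) := by
          simp [scanStepL, h1, h2]
        rw [e1, e2, ih (s + 1) (l ++ [stop]) (stop + 1), ih (s + 1) [stop] (stop + 1)]
        simp [scanL]
      · have e1 : scanStepL (l, stop) (s, c) = (l, stop) := by simp [scanStepL, h1, h2]
        have e2 : scanStepL ([], stop) (s, c) = ([], stop) := by simp [scanStepL, h1, h2]
        rw [e1, e2]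
        simpa [scanL] using ih (s + 1) l stop

theorem scanL_bounds (cs : List Char) : ∀ (s stop : Int), stop ≤ s →
    (stop ≤ (scanL cs s stop).2 ∧ (scanL cs s stop).2 ≤ s + cs.length ∧
      ∀ v ∈ (scanL cs s stop).1, stop ≤ v ∧ v < (scanL cs s stop).2) := by
  induction cs with
  | nil => intro s stop h; simp [scanL, PySem.List.enumerate_nil]; omega
  | cons c cs ih =>
    intro s stop h
    simp only [scanL, PySem.List.enumerate_cons, List.foldl_cons]
    by_cases h1 : c = '#'
    · have e2 : scanStepL ([], stop) (s, c) = ([], s + 1) := by simp [scanStepL, h1]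
      rw [e2, scanL_append cs (s + 1) [] (s + 1)]
      have H := ih (s + 1) (s + 1) le_rfl
      simp only [List.nil_append, List.length_cons]
      refine ⟨by omega, by push_cast; omega, ?_⟩
      intro v hv
      have := H.2.2 v hv
      omega
    · by_cases h2 : c = 'O'
      · have e2 : scanStepL ([], stop) (s, c) = ([stop], stop + 1) := by
          simp [scanStepL, h1, h2]
        rw [e2, scanL_append cs (s + 1) [stop] (stop + 1)]
        have H := ih (s + 1) (stop + 1) (by omega)
        simp only [List.length_cons]
        refine ⟨by omega, by push_cast; omega, ?_⟩
        intro v hv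
        rcases List.mem_append.mp hv with hv | hv
        · simp only [List.mem_singleton] at hv
          subst hv
          constructor
          · omega
          · have := H.1; omega
        · have := H.2.2 v hv; omega
      · have e2 : scanStepL ([], stop) (s, c) = ([], stop) := by simp [scanStepL, h1, h2]
        rw [e2, scanL_append cs (s + 1) [] stop]
        have H := ih (s + 1) stop (by omega)
        simp only [List.nil_append, List.length_cons]
        refine ⟨by omega, by push_cast; omega, ?_⟩
        intro v hv
        have := H.2.2 v hv
        omega

-- ===== the segment tilt of B computes the landing-slot characterisation =====

theorem count_go_single (v : Char) : ∀ (fuel : Nat) (l : List Char) (acc : Nat),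
    l.length ≤ fuel → PySem.Chars.count.go [v] fuel l acc = acc + l.count v := by
  intro fuel
  induction fuel with
  | zero =>
    intro l acc h
    have : l = [] := List.eq_nil_of_length_eq_zero (by omega)
    subst this
    simp [PySem.Chars.count.go]
  | succ f ih =>
    intro l acc h
    cases l with
    | nil => simp [PySem.Chars.count.go]
    | cons c t =>
      rw [PySem.Chars.count.go]
      by_cases hc : c = v
      · rw [if_pos (by simp [hc])]
        rw [ih _ _ (by simpa using h)]
        simp [hc, List.count_cons]
        omega
      · rw [if_neg (by simp [List.isPrefixOf]; exact fun hcc => hc hcc.symm)]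
        rw [ih _ _ (by simpa using h)]
        simp [List.count_cons, hc]

theorem count_single (l : List Char) (v : Char) : PySem.Chars.count l [v] = l.count v := by
  rw [PySem.Chars.count]
  rw [if_neg (by simp)]
  rw [count_go_single _ _ _ _ (by omega)]
  omega

theorem replace_go_single (v w : Char) : ∀ (fuel : Nat) (l : List Char) (acc : List Char),
    l.length ≤ fuel →
    PySem.Chars.replace.go [v] [w] fuel l acc =
      acc.reverse ++ l.map (fun c => if c = v then w else c) := by
  intro fuel
  induction fuel with
  | zero =>
    intro l acc h
    have : l = [] := List.eq_nil_of_length_eq_zero (by omega)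
    subst this
    simp [PySem.Chars.replace.go]
  | succ f ih =>
    intro l acc h
    cases l with
    | nil => simp [PySem.Chars.replace.go]
    | cons c t =>
      rw [PySem.Chars.replace.go]
      by_cases hc : c = v
      · rw [if_pos (by simp [hc])]
        rw [ih _ _ (by simpa using h)]
        simp [hc]
      · rw [if_neg (by simp [List.isPrefixOf]; exact fun hcc => hc hcc.symm)]
        rw [ih _ _ (by simpa using h)]
        simp [hc]

theorem replace_single (l : List Char) (v w : Char) :
    PySem.Chars.replace l [v] [w] = l.map (fun c => if c = v then w else c) := by
  rw [PySem.Chars.replace]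
  rw [if_neg (by simp)]
  rw [replace_go_single _ _ _ _ _ (by omega)]
  rfl

/-- Reference recursion for Python's split on the single character '#'. -/
def mySplit : List Char → List (List Char)
  | [] => [[]]
  | c :: t =>
    if c = '#' then [] :: mySplit t
    else
      match mySplit t with
      | [] => [[c]]
      | s :: r => (c :: s) :: r

def consHead (pre : List Char) : List (List Char) → List (List Char)
  | [] => [pre]
  | s :: r => (pre ++ s) :: r

theorem mySplit_ne_nil (cs : List Char) : mySplit cs ≠ [] := by
  cases cs with
  | nil => simp [mySplit]
  | cons c t =>
    rw [mySplit]
    by_cases hc : c = '#'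
    · simp [hc]
    · rw [if_neg hc]
      rcases h : mySplit t with _ | ⟨s, r⟩ <;> simp

theorem consHead_of_ne_nil (pre : List Char) (ls : List (List Char)) (h : ls ≠ []) :
    ∃ s r, ls = s :: r ∧ consHead pre ls = (pre ++ s) :: r := by
  cases ls with
  | nil => exact absurd rfl h
  | cons s r => exact ⟨s, r, rfl, rfl⟩

theorem splitOn_go_single : ∀ (fuel : Nat) (l cur : List Char) (acc : List (List Char)),
    l.length ≤ fuel →
    PySem.Chars.splitOn.go ['#'] fuel l cur acc =
      acc.reverse ++ consHead cur.reverse (mySplit l) := by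
  intro fuel
  induction fuel with
  | zero =>
    intro l cur acc h
    have : l = [] := List.eq_nil_of_length_eq_zero (by omega)
    subst this
    simp [PySem.Chars.splitOn.go, mySplit, consHead]
  | succ f ih =>
    intro l cur acc h
    cases l with
    | nil => simp [PySem.Chars.splitOn.go, mySplit, consHead]
    | cons c t =>
      rw [PySem.Chars.splitOn.go]
      by_cases hc : c = '#'
      · rw [if_pos (by simp [hc])]
        have hdrop : List.drop (['#'] : List Char).length (c :: t) = t := by simp
        rw [hdrop, ih _ _ _ (by simpa using h)]
        obtain ⟨s, r, hsr, hch⟩ := consHead_of_ne_nil [] (mySplit t) (mySplit_ne_nil t)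
        simp only [List.reverse_nil]
        rw [hch]
        rw [show mySplit (c :: t) = [] :: mySplit t by rw [mySplit]; exact if_pos hc,
          hsr]
        simp [consHead]
      · rw [if_neg (by simp [List.isPrefixOf]; exact fun hcc => hc hcc.symm)]
        rw [ih _ _ _ (by simpa using h)]
        obtain ⟨s, r, hsr, hch⟩ := consHead_of_ne_nil ((c :: cur).reverse) (mySplit t)
          (mySplit_ne_nil t)
        rw [hch]
        rw [show mySplit (c :: t) = match mySplit t with
            | [] => [[c]] | s :: r => (c :: s) :: r by rw [mySplit]; exact if_neg hc,
          hsr]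
        simp [consHead]

theorem splitOn_single (cs : List Char) : PySem.Chars.splitOn cs ['#'] = mySplit cs := by
  rw [PySem.Chars.splitOn, splitOn_go_single _ _ _ _ (by omega)]
  obtain ⟨s, r, hsr, hch⟩ := consHead_of_ne_nil [] (mySplit cs) (mySplit_ne_nil cs)
  simp only [List.reverse_nil]
  rw [hch, hsr]
  simp

theorem mySplit_noHash (cs : List Char) (h : '#' ∉ cs) : mySplit cs = [cs] := by
  induction cs with
  | nil => rfl
  | cons c t ih =>
    rw [show mySplit (c :: t) = match mySplit t with
        | [] => [[c]] | s :: r => (c :: s) :: r by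
      rw [mySplit]; exact if_neg (fun hc => h (by rw [hc]; exact List.mem_cons_self))]
    rw [ih (fun hm => h (List.mem_cons_of_mem _ hm))]

theorem mySplit_seg (seg rest : List Char) (h : '#' ∉ seg) :
    mySplit (seg ++ '#' :: rest) = seg :: mySplit rest := by
  induction seg with
  | nil => simp [mySplit]
  | cons c t ih =>
    rw [List.cons_append]
    rw [show mySplit (c :: (t ++ '#' :: rest)) = match mySplit (t ++ '#' :: rest) with
        | [] => [[c]] | s :: r => (c :: s) :: r by
      rw [mySplit]; exact if_neg (fun hc => h (by rw [hc]; exact List.mem_cons_self))]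
    rw [ih (fun hm => h (List.mem_cons_of_mem _ hm))]

theorem resettleP_eq (seg : List Char) :
    resettleP seg = List.replicate (seg.count 'O') 'O' ++
      (seg.drop (seg.count 'O')).map (fun c => if c = 'O' then '.' else c) := by
  rw [show resettleP seg = List.replicate (PySem.Chars.count seg ['O']) 'O' ++
      PySem.Chars.replace
        (PySem.List.slice seg (some ((PySem.Chars.count seg ['O'] : Nat) : Int)) none)
        ['O'] ['.'] from rfl]
  rw [count_single, PySem.List.slice_from_natCast, replace_single]

theorem resettleP_length (seg : List Char) : (resettleP seg).length = seg.length := by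
  rw [resettleP_eq]
  have := List.count_le_length (l := seg) (a := 'O')
  simp
  omega

theorem resettleP_getElem (seg : List Char) (j : Nat) (hj : j < seg.length) :
    (resettleP seg)[j]'(by rw [resettleP_length]; exact hj) =
      if j < seg.count 'O' then 'O' else if seg[j] = 'O' then '.' else seg[j] := by
  have hm := List.count_le_length (l := seg) (a := 'O')
  rcases Nat.lt_or_ge j (seg.count 'O') with hlt | hge
  · rw [if_pos hlt]
    have : (resettleP seg)[j]'(by rw [resettleP_length]; exact hj) =
        (List.replicate (seg.count 'O') 'O' ++
          (seg.drop (seg.count 'O')).map (fun c => if c = 'O' then '.' else c))[j]'(by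
            simpa [resettleP_eq] using (by rw [resettleP_length]; exact hj :
              j < (resettleP seg).length)) := by
      congr 1
      exact resettleP_eq seg
    rw [this, List.getElem_append_left (by simpa using hlt)]
    simp
  · rw [if_neg (by omega)]
    have hrl : (List.replicate (seg.count 'O') 'O').length = seg.count 'O' := by simp
    have : (resettleP seg)[j]'(by rw [resettleP_length]; exact hj) =
        (List.replicate (seg.count 'O') 'O' ++
          (seg.drop (seg.count 'O')).map (fun c => if c = 'O' then '.' else c))[j]'(by
            simpa [resettleP_eq] using (by rw [resettleP_length]; exact hj :
              j < (resettleP seg).length)) := by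
      congr 1
      exact resettleP_eq seg
    rw [this, List.getElem_append_right (by simpa using hge)]
    rw [List.getElem_map, List.getElem_drop]
    have hidx : seg.count 'O' + (j - (List.replicate (seg.count 'O') 'O').length) = j := by
      simp
      omega
    simp only [hidx]

theorem scanL_shift (cs : List Char) : ∀ (s stop d : Int),
    scanL cs (s + d) (stop + d) =
      ((scanL cs s stop).1.map (· + d), (scanL cs s stop).2 + d) := by
  induction cs with
  | nil => intro s stop d; simp [scanL, PySem.List.enumerate_nil]
  | cons c cs ih =>
    intro s stop d
    simp only [scanL, PySem.List.enumerate_cons, List.foldl_cons]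
    by_cases h1 : c = '#'
    · have e1 : scanStepL ([], stop + d) (s + d, c) = ([], (s + 1) + d) := by
        simp [scanStepL, h1]; ring
      have e2 : scanStepL ([], stop) (s, c) = ([], s + 1) := by simp [scanStepL, h1]
      rw [e1, e2, show s + d + 1 = (s + 1) + d by ring, scanL_append, scanL_append]
      simp only [List.nil_append]
      exact ih (s + 1) (s + 1) d
    · by_cases h2 : c = 'O'
      · have e1 : scanStepL ([], stop + d) (s + d, c) = ([stop + d], (stop + 1) + d) := by
          simp [scanStepL, h1, h2]; ring
        have e2 : scanStepL ([], stop) (s, c) = ([stop], stop + 1) := by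
          simp [scanStepL, h1, h2]
        rw [e1, e2, show s + d + 1 = (s + 1) + d by ring, scanL_append, scanL_append,
          ih (s + 1) (stop + 1) d]
        simp
      · have e1 : scanStepL ([], stop + d) (s + d, c) = ([], stop + d) := by
          simp [scanStepL, h1, h2]
        have e2 : scanStepL ([], stop) (s, c) = ([], stop) := by simp [scanStepL, h1, h2]
        rw [e1, e2, show s + d + 1 = (s + 1) + d by ring, scanL_append, scanL_append]
        simp only [List.nil_append]
        exact ih (s + 1) stop d

theorem scanL_noHash (cs : List Char) (h : '#' ∉ cs) : ∀ (s stop : Int),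
    scanL cs s stop =
      (PySem.List.pyRange stop (stop + cs.count 'O'), stop + cs.count 'O') := by
  induction cs with
  | nil =>
    intro s stop
    simp [scanL, PySem.List.enumerate_nil, PySem.List.pyRange_one_eq_nil]
  | cons c cs ih =>
    intro s stop
    have h1 : c ≠ '#' := fun hc => h (by rw [hc]; exact List.mem_cons_self)
    have hcs : '#' ∉ cs := fun hm => h (List.mem_cons_of_mem _ hm)
    simp only [scanL, PySem.List.enumerate_cons, List.foldl_cons]
    by_cases h2 : c = 'O'
    · have e2 : scanStepL ([], stop) (s, c) = ([stop], stop + 1) := by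
        simp [scanStepL, h1, h2]
      rw [e2, scanL_append, ih hcs (s + 1) (stop + 1)]
      have hcount : ((c :: cs).count 'O' : Int) = (cs.count 'O' : Int) + 1 := by
        simp [List.count_cons, h2]
      rw [Prod.mk.injEq]
      constructor
      · rw [PySem.List.pyRange_one_cons (show stop < stop + ((c :: cs).count 'O' : Int) by
          rw [hcount]; omega)]
        rw [show stop + ((c :: cs).count 'O' : Int) = stop + 1 + (cs.count 'O' : Int) by
          rw [hcount]; ring]
        simp
      · rw [hcount]
        ring
    · have e2 : scanStepL ([], stop) (s, c) = ([], stop) := by simp [scanStepL, h1, h2]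
      rw [e2, scanL_append, ih hcs (s + 1) stop]
      simp [List.count_cons, h2]

theorem scanL_hash_split (pre rest : List Char) (s stop : Int) :
    scanL (pre ++ '#' :: rest) s stop =
      ((scanL pre s stop).1 ++
          (scanL rest (s + pre.length + 1) (s + pre.length + 1)).1,
        (scanL rest (s + pre.length + 1) (s + pre.length + 1)).2) := by
  simp only [scanL, PySem.List.enumerate_append, List.foldl_append,
    PySem.List.enumerate_cons, List.foldl_cons]
  have e1 : (PySem.List.enumerate pre s).foldl scanStepL ([], stop) = scanL pre s stop := rfl
  rw [e1]
  have e2 : scanStepL (scanL pre s stop) (s + (pre.length : Int), '#') =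
      ((scanL pre s stop).1, s + (pre.length : Int) + 1) := by
    rcases hsc : scanL pre s stop with ⟨L1, t1⟩
    simp [scanStepL]
  rw [e2, scanL_append]
  rfl

theorem tiltP_noHash (cs : List Char) (h : '#' ∉ cs) : tiltP cs = resettleP cs := by
  unfold tiltP
  rw [splitOn_single, mySplit_noHash cs h]
  simp only [List.map_cons, List.map_nil]
  exact PySem.Chars.join_singleton ['#'] (resettleP cs)

theorem tiltP_split (seg rest : List Char) (h : '#' ∉ seg) :
    tiltP (seg ++ '#' :: rest) = resettleP seg ++ '#' :: tiltP rest := by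
  unfold tiltP
  rw [splitOn_single, splitOn_single, mySplit_seg seg rest h]
  obtain ⟨s0, r0, hsr⟩ : ∃ s0 r0, mySplit rest = s0 :: r0 := by
    rcases hms : mySplit rest with _ | ⟨s0, r0⟩
    · exact absurd hms (mySplit_ne_nil rest)
    · exact ⟨s0, r0, rfl⟩
  rw [hsr]
  simp only [List.map_cons]
  rw [PySem.Chars.join_cons_cons]
  simp

theorem hash_decomp (cs : List Char) (h : '#' ∈ cs) :
    ∃ seg rest, cs = seg ++ '#' :: rest ∧ '#' ∉ seg := by
  have hsplit := List.takeWhile_append_dropWhile (p := fun c => c != '#') (l := cs)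
  have hne : cs.dropWhile (fun c => c != '#') ≠ [] := by
    intro hc
    rw [List.dropWhile_eq_nil_iff] at hc
    have := hc '#' h
    simp at this
  have hhead : (cs.dropWhile (fun c => c != '#')).head hne = '#' := by
    have := List.head_dropWhile_not (p := fun c => c != '#') (l := cs) hne
    simpa using this
  have hdr : cs.dropWhile (fun c => c != '#') =
      '#' :: (cs.dropWhile (fun c => c != '#')).tail := by
    have h1 := List.cons_head_tail hne
    rw [hhead] at h1
    exact h1.symm
  refine ⟨cs.takeWhile (fun c => c != '#'), (cs.dropWhile (fun c => c != '#')).tail, ?_, ?_⟩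
  · conv_lhs => rw [← hsplit]
    exact congrArg (cs.takeWhile (fun c => c != '#') ++ ·) hdr
  · intro hm
    have := List.mem_takeWhile_imp hm
    simp at this

theorem tiltP_length_aux : ∀ (n : Nat) (cs : List Char), cs.length ≤ n →
    (tiltP cs).length = cs.length := by
  intro n
  induction n with
  | zero =>
    intro cs h
    have : cs = [] := List.eq_nil_of_length_eq_zero (by omega)
    subst this
    rw [tiltP_noHash _ (by simp), resettleP_length]
  | succ k ih =>
    intro cs h
    by_cases hm : '#' ∈ cs
    · obtain ⟨seg, rest, rfl, hseg⟩ := hash_decomp cs hm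
      rw [tiltP_split seg rest hseg]
      have hr : (tiltP rest).length = rest.length := by
        apply ih
        simp [List.length_append] at h
        omega
      simp [resettleP_length, hr]
    · rw [tiltP_noHash cs hm, resettleP_length]

theorem tiltP_length (cs : List Char) : (tiltP cs).length = cs.length :=
  tiltP_length_aux cs.length cs le_rfl

theorem landsOf_noHash_mem (cs : List Char) (hm : '#' ∉ cs) (v : Int) :
    v ∈ landsOf cs ↔ 0 ≤ v ∧ v < (cs.count 'O' : Int) := by
  unfold landsOf
  rw [scanL_noHash cs hm 0 0]
  simp only [PySem.List.mem_pyRange_one]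
  omega

theorem landsOf_nonneg (cs : List Char) (v : Int) (hv : v ∈ landsOf cs) : 0 ≤ v :=
  ((scanL_bounds cs 0 0 le_rfl).2.2 v hv).1

theorem landsOf_split (seg rest : List Char) (hseg : '#' ∉ seg) (v : Int) :
    v ∈ landsOf (seg ++ '#' :: rest) ↔
      (0 ≤ v ∧ v < (seg.count 'O' : Int)) ∨
        (∃ w ∈ landsOf rest, v = w + ((seg.length : Int) + 1)) := by
  unfold landsOf
  rw [scanL_hash_split seg rest 0 0]
  simp only [List.mem_append]
  constructor
  · rintro (hv | hv)
    · left
      have := (landsOf_noHash_mem seg hseg v).mp hv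
      exact this
    · right
      have hsh := scanL_shift rest 0 0 ((seg.length : Int) + 1)
      rw [show (0 : Int) + (seg.length : Int) + 1 = 0 + ((seg.length : Int) + 1) by ring,
        hsh] at hv
      simp only [zero_add] at hv ⊢
      obtain ⟨w, hw, hvw⟩ := List.mem_map.mp hv
      exact ⟨w, hw, hvw.symm⟩
  · rintro (hv | ⟨w, hw, rfl⟩)
    · left
      exact (landsOf_noHash_mem seg hseg v).mpr hv
    · right
      have hsh := scanL_shift rest 0 0 ((seg.length : Int) + 1)
      rw [show (0 : Int) + (seg.length : Int) + 1 = 0 + ((seg.length : Int) + 1) by ring,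
        hsh]
      exact List.mem_map.mpr ⟨w, hw, rfl⟩

theorem tiltP_getElem_aux : ∀ (n : Nat) (cs : List Char), cs.length ≤ n →
    ∀ (j : Nat) (hj : j < cs.length),
    (tiltP cs)[j]'(by rw [tiltP_length]; exact hj) =
      if (j : Int) ∈ landsOf cs then 'O' else if cs[j] = 'O' then '.' else cs[j] := by
  intro n
  induction n with
  | zero =>
    intro cs h j hj
    omega
  | succ k ih =>
    intro cs h j hj
    by_cases hm : '#' ∈ cs
    · obtain ⟨seg, rest, rfl, hseg⟩ := hash_decomp cs hm
      have hmle : seg.count 'O' ≤ seg.length := List.count_le_length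
      have hlen : (seg ++ '#' :: rest).length = seg.length + 1 + rest.length := by
        simp [List.length_append]
        omega
      have hEq : (tiltP (seg ++ '#' :: rest))[j]'(by rw [tiltP_length]; exact hj) =
          (resettleP seg ++ '#' :: tiltP rest)[j]'(by
            rw [← tiltP_split seg rest hseg, tiltP_length]; exact hj) := by
        congr 1
        exact tiltP_split seg rest hseg
      rw [hEq]
      rcases Nat.lt_trichotomy j seg.length with hjl | hje | hjg
      · -- inside the first segment
        rw [List.getElem_append_left (by rw [resettleP_length]; exact hjl),
          resettleP_getElem seg j hjl,
          List.getElem_append_left hjl]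
        have hnotr : ¬ ((j : Int) ∈ landsOf (seg ++ '#' :: rest) ∧
            ¬ (0 ≤ (j : Int) ∧ (j : Int) < (seg.count 'O' : Int))) := by
          rintro ⟨hmem, hno⟩
          rcases (landsOf_split seg rest hseg _).mp hmem with hv | ⟨w, hw, hvw⟩
          · exact hno hv
          · have := landsOf_nonneg rest w hw
            omega
        by_cases hc : j < seg.count 'O'
        · rw [if_pos hc, if_pos (by
            exact (landsOf_split seg rest hseg _).mpr (Or.inl (by push_cast; omega)))]
        · rw [if_neg hc,
            if_neg (show ¬ ((j : Int) ∈ landsOf (seg ++ '#' :: rest)) from fun hmem =>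
              hnotr ⟨hmem, by push_cast; omega⟩)]
      · -- exactly the '#'
        subst hje
        have hL1 : (resettleP seg).length ≤ seg.length := by rw [resettleP_length]
        rw [List.getElem_append_right hL1, List.getElem_append_right (le_refl seg.length)]
        have hidx1 : seg.length - (resettleP seg).length = 0 := by rw [resettleP_length]; omega
        have hidx2 : seg.length - seg.length = 0 := by omega
        simp only [hidx1, hidx2, List.getElem_cons_zero]
        rw [if_neg (show ¬ (((seg.length : Nat) : Int) ∈ landsOf (seg ++ '#' :: rest)) from by
          intro hmem
          rcases (landsOf_split seg rest hseg _).mp hmem with hv | ⟨w, hw, hvw⟩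
          · omega
          · have := landsOf_nonneg rest w hw
            omega)]
        rw [if_neg (by decide)]
      · -- inside the tail
        have hjr : j - seg.length - 1 < rest.length := by
          rw [hlen] at hj
          omega
        have hrk : rest.length ≤ k := by
          rw [hlen] at h
          omega
        have hLle : (resettleP seg).length ≤ j := by rw [resettleP_length]; omega
        rw [List.getElem_append_right hLle, List.getElem_append_right (le_of_lt hjg)]
        rw [List.getElem_cons, List.getElem_cons,
          dif_neg (show ¬ (j - (resettleP seg).length = 0) from by
            rw [resettleP_length]; omega),
          dif_neg (show ¬ (j - seg.length = 0) from by omega)]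
        rw [show (tiltP rest)[j - (resettleP seg).length - 1]'(by
              rw [tiltP_length, resettleP_length]
              omega) =
            (tiltP rest)[j - seg.length - 1]'(by rw [tiltP_length]; exact hjr) from
          getElem_congr rfl (by rw [resettleP_length]) (by
            rw [tiltP_length, resettleP_length]; omega)]
        rw [ih rest hrk (j - seg.length - 1) hjr]
        have hiff : ((j - seg.length - 1 : Nat) : Int) ∈ landsOf rest ↔
            (j : Int) ∈ landsOf (seg ++ '#' :: rest) := by
          rw [landsOf_split seg rest hseg]
          constructor
          · intro hmem
            exact Or.inr ⟨_, hmem, by push_cast; omega⟩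
          · rintro (hv | ⟨w, hw, hvw⟩)
            · omega
            · have hwj : w = ((j - seg.length - 1 : Nat) : Int) := by push_cast at hvw ⊢; omega
              rw [← hwj]
              exact hw
        by_cases hc : ((j - seg.length - 1 : Nat) : Int) ∈ landsOf rest
        · rw [if_pos hc, if_pos (hiff.mp hc)]
        · rw [if_neg hc, if_neg (show ¬ ((j : Int) ∈ landsOf (seg ++ '#' :: rest)) from
            fun hmem => hc (hiff.mpr hmem))]
    · -- no '#', a single segment
      have hEq : (tiltP cs)[j]'(by rw [tiltP_length]; exact hj) =
          (resettleP cs)[j]'(by rw [← tiltP_noHash cs hm, tiltP_length]; exact hj) := by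
        congr 1
        exact tiltP_noHash cs hm
      rw [hEq, resettleP_getElem cs j hj]
      by_cases hc : j < cs.count 'O'
      · rw [if_pos hc, if_pos ((landsOf_noHash_mem cs hm _).mpr (by push_cast; omega))]
      · rw [if_neg hc, if_neg (show ¬ ((j : Int) ∈ landsOf cs) from by
          intro hmem
          have := (landsOf_noHash_mem cs hm _).mp hmem
          omega)]

theorem tiltP_getElem (cs : List Char) (j : Nat) (hj : j < cs.length) :
    (tiltP cs)[j]'(by rw [tiltP_length]; exact hj) =
      if (j : Int) ∈ landsOf cs then 'O' else if cs[j] = 'O' then '.' else cs[j] :=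
  tiltP_getElem_aux cs.length cs le_rfl j hj

-- ===== A's roll/rotate tracked against the row-list grid =====

theorem dotCons {c : Char} {cs : List Char} {s k2 : Int} :
    (∃ j : Nat, ∃ _ : j < (c :: cs).length, k2 = s + (j : Int) ∧ (c :: cs)[j] = 'O') ↔
      ((c = 'O' ∧ k2 = s) ∨
        ∃ j : Nat, ∃ _ : j < cs.length, k2 = (s + 1) + (j : Int) ∧ cs[j] = 'O') := by
  constructor
  · rintro ⟨j, hj, hk, hO⟩
    cases j with
    | zero =>
      left
      simp only [List.getElem_cons_zero] at hO
      exact ⟨hO, by omega⟩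
    | succ j =>
      right
      refine ⟨j, by simpa using hj, by push_cast at hk ⊢; omega, by simpa using hO⟩
  · rintro (⟨hO, hk⟩ | ⟨j, hj, hk, hO⟩)
    · exact ⟨0, by simp, by omega, by simpa using hO⟩
    · exact ⟨j + 1, by simpa using hj, by push_cast at hk ⊢; omega, by simpa using hO⟩

theorem innerA (x : Int) (cs : List Char) : ∀ (s stop : Int)
    (t : PySem.Dict (Int × Int) Char), 0 ≤ stop → stop ≤ s →
    (∀ j : Nat, (hj : j < cs.length) → t.get? (x, s + (j : Int)) = some cs[j]) →
    ((PySem.List.enumerate cs s).foldl (stepA x) (t, stop)).2 = (scanL cs s stop).2 ∧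
    (t.keys.Nodup → ((PySem.List.enumerate cs s).foldl (stepA x) (t, stop)).1.keys.Nodup) ∧
    ∀ k : Int × Int,
      ((PySem.List.enumerate cs s).foldl (stepA x) (t, stop)).1.get? k =
        if k.1 = x ∧ k.2 ∈ (scanL cs s stop).1 then some 'O'
        else if k.1 = x ∧ ∃ j : Nat, ∃ _ : j < cs.length,
            k.2 = s + (j : Int) ∧ cs[j] = 'O' then some '.'
        else t.get? k := by
  induction cs with
  | nil =>
    intro s stop t h0 hs ht
    refine ⟨by simp [scanL, PySem.List.enumerate_nil], fun h => by simpa using h, ?_⟩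
    intro k
    simp [scanL, PySem.List.enumerate_nil]
  | cons c cs ih =>
    intro s stop t h0 hs ht
    simp only [PySem.List.enumerate_cons, List.foldl_cons]
    have hsc0 : scanL (c :: cs) s stop =
        (PySem.List.enumerate cs (s + 1)).foldl scanStepL (scanStepL ([], stop) (s, c)) := by
      simp [scanL, PySem.List.enumerate_cons]
    by_cases h1 : c = '#'
    · -- '#' : stop := s + 1, nothing written
      have eA : stepA x (t, stop) (s, c) = (t, s + 1) := by simp [stepA, h1]
      have eS : scanStepL ([], stop) (s, c) = ([], s + 1) := by simp [scanStepL, h1]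
      have hscan : scanL (c :: cs) s stop = scanL cs (s + 1) (s + 1) := by
        rw [hsc0, eS]; rfl
      rw [eA, hscan]
      have ht' : ∀ j : Nat, (hj : j < cs.length) →
          t.get? (x, (s + 1) + (j : Int)) = some cs[j] := by
        intro j hj
        have h := ht (j + 1) (by simpa using hj)
        have harith : s + 1 + (j : Int) = s + ((j : Int) + 1) := by ring
        rw [harith]
        simpa using h
      obtain ⟨H1, H2, H3⟩ := ih (s + 1) (s + 1) t (by omega) le_rfl ht'
      refine ⟨H1, H2, ?_⟩
      intro k
      rw [H3 k]
      have hD : (k.1 = x ∧ ∃ j : Nat, ∃ _ : j < (c :: cs).length,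
          k.2 = s + (j : Int) ∧ (c :: cs)[j] = 'O') ↔
          (k.1 = x ∧ ∃ j : Nat, ∃ _ : j < cs.length, k.2 = (s + 1) + (j : Int) ∧ cs[j] = 'O') := by
        rw [and_congr_right_iff]
        intro _
        rw [dotCons]
        simp [h1]
      rw [if_congr hD rfl rfl]
    · by_cases h2 : c = 'O'
      · by_cases h3 : s > stop
        · -- moved 'O'
          have eA : stepA x (t, stop) (s, c) =
              ((t.insert (x, s) '.').insert (x, stop) 'O', stop + 1) := by
            simp [stepA, h1, h2, h3]
          have eS : scanStepL ([], stop) (s, c) = ([stop], stop + 1) := by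
            simp [scanStepL, h1, h2]
          have hscan1 : (scanL (c :: cs) s stop).1 = stop :: (scanL cs (s + 1) (stop + 1)).1 := by
            rw [hsc0, eS, scanL_append]; rfl
          have hscan2 : (scanL (c :: cs) s stop).2 = (scanL cs (s + 1) (stop + 1)).2 := by
            rw [hsc0, eS, scanL_append]
          rw [eA]
          set t' := (t.insert (x, s) '.').insert (x, stop) 'O' with ht'def
          have ht' : ∀ j : Nat, (hj : j < cs.length) →
              t'.get? (x, (s + 1) + (j : Int)) = some cs[j] := by
            intro j hj
            have hne1 : ((x, (s + 1) + (j : Int)) : Int × Int) ≠ (x, stop) := by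
              intro hc; rw [Prod.mk.injEq] at hc; omega
            have hne2 : ((x, (s + 1) + (j : Int)) : Int × Int) ≠ (x, s) := by
              intro hc; rw [Prod.mk.injEq] at hc; omega
            rw [ht'def, PySem.Dict.get?_insert_of_ne _ _ hne1,
              PySem.Dict.get?_insert_of_ne _ _ hne2]
            have h := ht (j + 1) (by simpa using hj)
            have harith : s + 1 + (j : Int) = s + ((j : Int) + 1) := by ring
            rw [harith]
            simpa using h
          obtain ⟨H1, H2, H3⟩ := ih (s + 1) (stop + 1) t' (by omega) (by omega) ht'
          have hrest := scanL_bounds cs (s + 1) (stop + 1) (by omega)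
          refine ⟨by rw [H1, hscan2], ?_, ?_⟩
          · intro hnd
            exact H2 (PySem.Dict.nodup_keys_insert _ _ _ (PySem.Dict.nodup_keys_insert _ _ _ hnd))
          · intro k
            rw [H3 k, hscan1]
            by_cases hkx : k.1 = x
            · by_cases hkL : k.2 ∈ (scanL cs (s + 1) (stop + 1)).1
              · rw [if_pos ⟨hkx, hkL⟩, if_pos ⟨hkx, List.mem_cons_of_mem _ hkL⟩]
              · by_cases hkD : ∃ j : Nat, ∃ _ : j < cs.length,
                    k.2 = (s + 1) + (j : Int) ∧ cs[j] = 'O'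
                · obtain ⟨j, hj, hk2, hO⟩ := hkD
                  rw [if_neg (fun hc => hkL hc.2), if_pos ⟨hkx, ⟨j, hj, hk2, hO⟩⟩]
                  rw [if_neg (by
                      rintro ⟨-, hmem⟩
                      rcases List.mem_cons.mp hmem with hh | hh
                      · omega
                      · exact hkL (hk2 ▸ hh)),
                    if_pos ⟨hkx, dotCons.mpr (Or.inr ⟨j, hj, hk2, hO⟩)⟩]
                · rw [if_neg (fun hc => hkL hc.2), if_neg (fun hc => hkD hc.2)]
                  by_cases hks : k.2 = stop
                  · have hkk : k = (x, stop) := Prod.ext_iff.mpr ⟨hkx, hks⟩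
                    rw [hkk, ht'def, PySem.Dict.get?_insert_self,
                      if_pos ⟨rfl, by simp⟩]
                  · by_cases hks2 : k.2 = s
                    · have hkk : k = (x, s) := Prod.ext_iff.mpr ⟨hkx, hks2⟩
                      have hne : ((x, s) : Int × Int) ≠ (x, stop) := by
                        intro hc; rw [Prod.mk.injEq] at hc; omega
                      rw [hkk, ht'def, PySem.Dict.get?_insert_of_ne _ _ hne,
                        PySem.Dict.get?_insert_self]
                      rw [if_neg (by
                          rintro ⟨-, hmem⟩
                          rcases List.mem_cons.mp hmem with hh | hh
                          · omega
                          · exact hkL (hks2 ▸ hh)),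
                        if_pos ⟨rfl, dotCons.mpr (Or.inl ⟨h2, rfl⟩)⟩]
                    · have hne1 : k ≠ (x, stop) := by
                        intro hc; rw [hc] at hks; exact hks rfl
                      have hne2 : k ≠ (x, s) := by
                        intro hc; rw [hc] at hks2; exact hks2 rfl
                      rw [ht'def, PySem.Dict.get?_insert_of_ne _ _ hne1,
                        PySem.Dict.get?_insert_of_ne _ _ hne2]
                      rw [if_neg (by
                          rintro ⟨-, hmem⟩
                          rcases List.mem_cons.mp hmem with hh | hh
                          · exact hks hh
                          · exact hkL hh),
                        if_neg (by
                          rintro ⟨-, hD⟩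
                          rcases dotCons.mp hD with ⟨-, hk2⟩ | hD'
                          · exact hks2 hk2
                          · exact hkD hD')]
            · rw [if_neg (fun hc => hkx hc.1), if_neg (fun hc => hkx hc.1),
                if_neg (fun hc => hkx hc.1), if_neg (fun hc => hkx hc.1)]
              have hne1 : k ≠ (x, stop) := by intro hc; rw [hc] at hkx; exact hkx rfl
              have hne2 : k ≠ (x, s) := by intro hc; rw [hc] at hkx; exact hkx rfl
              rw [ht'def, PySem.Dict.get?_insert_of_ne _ _ hne1,
                PySem.Dict.get?_insert_of_ne _ _ hne2]
        · -- unmoved 'O' : stop = s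
          have hse : stop = s := by omega
          subst hse
          have eA : stepA x (t, stop) (stop, c) = (t, stop + 1) := by
            simp [stepA, h1, h2]
          have eS : scanStepL ([], stop) (stop, c) = ([stop], stop + 1) := by
            simp [scanStepL, h1, h2]
          have hscan1 : (scanL (c :: cs) stop stop).1 =
              stop :: (scanL cs (stop + 1) (stop + 1)).1 := by
            rw [hsc0, eS, scanL_append]; rfl
          have hscan2 : (scanL (c :: cs) stop stop).2 = (scanL cs (stop + 1) (stop + 1)).2 := by
            rw [hsc0, eS, scanL_append]
          rw [eA]
          have ht' : ∀ j : Nat, (hj : j < cs.length) →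
              t.get? (x, (stop + 1) + (j : Int)) = some cs[j] := by
            intro j hj
            have h := ht (j + 1) (by simpa using hj)
            have harith : stop + 1 + (j : Int) = stop + ((j : Int) + 1) := by ring
            rw [harith]
            simpa using h
          obtain ⟨H1, H2, H3⟩ := ih (stop + 1) (stop + 1) t (by omega) le_rfl ht'
          have hrest := scanL_bounds cs (stop + 1) (stop + 1) le_rfl
          refine ⟨by rw [H1, hscan2], H2, ?_⟩
          intro k
          rw [H3 k, hscan1]
          by_cases hkx : k.1 = x
          · by_cases hkL : k.2 ∈ (scanL cs (stop + 1) (stop + 1)).1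
            · rw [if_pos ⟨hkx, hkL⟩, if_pos ⟨hkx, List.mem_cons_of_mem _ hkL⟩]
            · by_cases hkD : ∃ j : Nat, ∃ _ : j < cs.length,
                  k.2 = (stop + 1) + (j : Int) ∧ cs[j] = 'O'
              · rw [if_neg (fun hc => hkL hc.2), if_pos ⟨hkx, hkD⟩]
                obtain ⟨j, hj, hk2, hO⟩ := hkD
                rw [if_neg (by
                    rintro ⟨-, hmem⟩
                    rcases List.mem_cons.mp hmem with hh | hh
                    · omega
                    · exact hkL (hk2 ▸ hh)),
                  if_pos ⟨hkx, dotCons.mpr (Or.inr ⟨j, hj, hk2, hO⟩)⟩]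
              · rw [if_neg (fun hc => hkL hc.2), if_neg (fun hc => hkD hc.2)]
                by_cases hks : k.2 = stop
                · have hkk : k = (x, stop) := Prod.ext_iff.mpr ⟨hkx, hks⟩
                  have h00 := ht 0 (by simp)
                  simp only [List.getElem_cons_zero, Int.natCast_zero, add_zero] at h00
                  rw [hkk, h00, if_pos ⟨rfl, by simp⟩, h2]
                · rw [if_neg (by
                      rintro ⟨-, hmem⟩
                      rcases List.mem_cons.mp hmem with hh | hh
                      · exact hks hh
                      · exact hkL hh),
                    if_neg (by
                      rintro ⟨-, hD⟩
                      rcases dotCons.mp hD with ⟨-, hk2⟩ | hD'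
                      · exact hks hk2
                      · exact hkD hD')]
          · rw [if_neg (fun hc => hkx hc.1), if_neg (fun hc => hkx hc.1),
              if_neg (fun hc => hkx hc.1), if_neg (fun hc => hkx hc.1)]
      · -- other character: nothing happens
        have eA : stepA x (t, stop) (s, c) = (t, stop) := by simp [stepA, h1, h2]
        have eS : scanStepL ([], stop) (s, c) = ([], stop) := by simp [scanStepL, h1, h2]
        have hscan : scanL (c :: cs) s stop = scanL cs (s + 1) stop := by
          rw [hsc0, eS]; rfl
        rw [eA, hscan]
        have ht' : ∀ j : Nat, (hj : j < cs.length) →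
            t.get? (x, (s + 1) + (j : Int)) = some cs[j] := by
          intro j hj
          have h := ht (j + 1) (by simpa using hj)
          have harith : s + 1 + (j : Int) = s + ((j : Int) + 1) := by ring
          rw [harith]
          simpa using h
        obtain ⟨H1, H2, H3⟩ := ih (s + 1) stop t h0 (by omega) ht'
        refine ⟨H1, H2, ?_⟩
        intro k
        rw [H3 k]
        have hD : (k.1 = x ∧ ∃ j : Nat, ∃ _ : j < (c :: cs).length,
            k.2 = s + (j : Int) ∧ (c :: cs)[j] = 'O') ↔
            (k.1 = x ∧ ∃ j : Nat, ∃ _ : j < cs.length,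
              k.2 = (s + 1) + (j : Int) ∧ cs[j] = 'O') := by
          rw [and_congr_right_iff]
          intro _
          rw [dotCons]
          simp [h2]
        rw [if_congr hD rfl rfl]

/-- The tilted value of column `x` at height `y` (both in range). -/
def tiltedCell (g : List (List Char)) (x y : Nat) : Char :=
  (tiltP (colG g x)).getD y ' '

theorem cellO_eq {g : List (List Char)} {Hn Wn : Nat} (hrect : RectG g Hn Wn) (x y : Int) :
    cellO g x y =
      if 0 ≤ x ∧ x < (Wn : Int) ∧ 0 ≤ y ∧ y < (Hn : Int) then
        some ((colG g x.toNat).getD y.toNat ' ')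
      else none := by
  obtain ⟨hlen, hrow⟩ := hrect
  unfold cellO
  by_cases hin : 0 ≤ x ∧ x < (Wn : Int) ∧ 0 ≤ y ∧ y < (Hn : Int)
  · rw [if_pos ⟨hin.1, hin.2.2.1⟩, if_pos hin]
    have hyb : y.toNat < g.length := by omega
    rw [List.getElem?_eq_getElem hyb]
    simp only [Option.bind_some]
    have hrl : (g[y.toNat]).length = Wn := hrow _ (List.getElem_mem hyb)
    have hxb : x.toNat < (g[y.toNat]).length := by omega
    rw [List.getElem?_eq_getElem hxb]
    have hcl : y.toNat < (colG g x.toNat).length := by simpa [colG] using hyb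
    rw [List.getD_eq_getElem _ _ hcl]
    simp only [colG, List.getElem_map]
    rw [List.getD_eq_getElem _ _ hxb]
  · rw [if_neg hin]
    by_cases hg : 0 ≤ x ∧ 0 ≤ y
    · rw [if_pos hg]
      by_cases hyH : y < (Hn : Int)
      · have hyb : y.toNat < g.length := by omega
        rw [List.getElem?_eq_getElem hyb]
        simp only [Option.bind_some]
        have hrl : (g[y.toNat]).length = Wn := hrow _ (List.getElem_mem hyb)
        rw [List.getElem?_eq_none (by omega)]
      · rw [List.getElem?_eq_none (by omega)]
        rfl
    · rw [if_neg hg]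

theorem innerRollA {d : PySem.Dict (Int × Int) Char} {g : List (List Char)} {Hn Wn : Nat}
    (hnd : d.keys.Nodup)
    (hget : ∀ x y : Int, 0 ≤ x → x < (Wn : Int) → 0 ≤ y → y < (Hn : Int) →
      d.get? (x, y) = some ((colG g x.toNat).getD y.toNat ' '))
    (hrect : RectG g Hn Wn) :
    ∀ n : Nat, n ≤ Wn →
    (((List.range n).foldl (fun target k =>
      ((PySem.List.pyRange 0 (Hn : Int)).foldl
        (fun (st : PySem.Dict (Int × Int) Char × Int) y =>
          let c := d.getD (((k : Nat) : Int), y) ' '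
          if c = '#' then (st.1, y + 1)
          else if c = 'O' then
            (if y > st.2 then (st.1.insert (((k : Nat) : Int), y) '.').insert
              (((k : Nat) : Int), st.2) 'O' else st.1, st.2 + 1)
          else st)
        (target, 0)).1) d).keys.Nodup) ∧
    ∀ x y : Int, ((List.range n).foldl (fun target k =>
      ((PySem.List.pyRange 0 (Hn : Int)).foldl
        (fun (st : PySem.Dict (Int × Int) Char × Int) y =>
          let c := d.getD (((k : Nat) : Int), y) ' '
          if c = '#' then (st.1, y + 1)
          else if c = 'O' then
            (if y > st.2 then (st.1.insert (((k : Nat) : Int), y) '.').insert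
              (((k : Nat) : Int), st.2) 'O' else st.1, st.2 + 1)
          else st)
        (target, 0)).1) d).get? (x, y) =
      if 0 ≤ x ∧ x < (n : Int) ∧ 0 ≤ y ∧ y < (Hn : Int) then
        some (tiltedCell g x.toNat y.toNat)
      else d.get? (x, y) := by
  intro n
  induction n with
  | zero =>
    intro _
    simp only [List.range_zero, List.foldl_nil]
    refine ⟨hnd, ?_⟩
    intro x y
    rw [if_neg (by omega)]
  | succ n ihn =>
    intro hn1
    obtain ⟨Hnd, Hget⟩ := ihn (by omega)
    rw [List.range_succ, List.foldl_append, List.foldl_cons, List.foldl_nil]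
    have hcol_len : (colG g n).length = Hn := by simp [colG, hrect.1]
    have hnW : (n : Int) < (Wn : Int) := by exact_mod_cast hn1
    have hcols : ∀ j : Nat, (hj : j < (colG g n).length) →
        ((List.range n).foldl (fun target k =>
          ((PySem.List.pyRange 0 (Hn : Int)).foldl
            (fun (st : PySem.Dict (Int × Int) Char × Int) y =>
              let c := d.getD (((k : Nat) : Int), y) ' '
              if c = '#' then (st.1, y + 1)
              else if c = 'O' then
                (if y > st.2 then (st.1.insert (((k : Nat) : Int), y) '.').insert
                  (((k : Nat) : Int), st.2) 'O' else st.1, st.2 + 1)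
              else st)
            (target, 0)).1) d).get? (((n : Nat) : Int), 0 + (j : Int)) =
          some (colG g n)[j] := by
      intro j hj
      have hjH : j < Hn := by rw [hcol_len] at hj; exact hj
      rw [Hget, if_neg (by omega),
        hget _ _ (by omega) (by exact_mod_cast hnW) (by omega) (by push_cast; omega)]
      simp only [zero_add, Int.toNat_natCast]
      rw [List.getD_eq_getElem _ _ hj]
    have hconv : ∀ t : PySem.Dict (Int × Int) Char,
        (PySem.List.pyRange 0 (Hn : Int)).foldl
          (fun (st : PySem.Dict (Int × Int) Char × Int) y =>
            let c := d.getD (((n : Nat) : Int), y) ' '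
            if c = '#' then (st.1, y + 1)
            else if c = 'O' then
              (if y > st.2 then (st.1.insert (((n : Nat) : Int), y) '.').insert
                (((n : Nat) : Int), st.2) 'O' else st.1, st.2 + 1)
            else st)
          (t, 0) =
        (PySem.List.enumerate (colG g n) 0).foldl (stepA ((n : Nat) : Int)) (t, 0) := by
      intro t
      rw [PySem.List.enumerate_eq_map_pyRange (colG g n) ' ', List.foldl_map]
      rw [show PySem.List.len (colG g n) = ((Hn : Nat) : Int) by
        rw [PySem.List.len_eq, hcol_len]]
      refine (PySem.List.foldl_congr_mem _ _ _ _ ?_).symm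
      intro acc y hy
      rw [PySem.List.mem_pyRange_one] at hy
      have hread : PySem.List.pyGetD (colG g n) y ' ' = d.getD (((n : Nat) : Int), y) ' ' := by
        rw [PySem.Dict.getD_eq_get?_getD,
          hget _ _ (by omega) (by exact_mod_cast hnW) hy.1 hy.2]
        simp only [Int.toNat_natCast, Option.getD_some]
        rw [PySem.List.pyGetD_eq_getElem _ _ hy.1 (by simpa [hcol_len] using hy.2)]
        rw [List.getD_eq_getElem _ _ (by rw [hcol_len]; omega)]
      simp only [stepA, hread]
    rw [hconv]
    obtain ⟨I1, I2, I3⟩ := innerA ((n : Nat) : Int) (colG g n) 0 0 _ le_rfl le_rfl hcols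
    have bounds := scanL_bounds (colG g n) 0 0 le_rfl
    have hb2 : (scanL (colG g n) 0 0).2 ≤ (Hn : Int) := by
      have h := bounds.2.1
      rw [hcol_len] at h
      omega
    refine ⟨I2 Hnd, ?_⟩
    intro x y
    rw [I3 (x, y)]
    by_cases hkx : x = ((n : Nat) : Int)
    · by_cases hL : y ∈ (scanL (colG g n) 0 0).1
      · have hyb := bounds.2.2 y hL
        rw [if_pos ⟨hkx, hL⟩, if_pos (by push_cast; omega)]
        unfold tiltedCell
        have hxn : x.toNat = n := by omega
        rw [hxn, List.getD_eq_getElem _ _ (by rw [tiltP_length, hcol_len]; omega),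
          tiltP_getElem _ _ (by rw [hcol_len]; omega)]
        rw [if_pos (show ((y.toNat : Nat) : Int) ∈ landsOf (colG g n) by
          rw [show ((y.toNat : Nat) : Int) = y by omega]; exact hL)]
      · by_cases hD : ∃ j : Nat, ∃ _ : j < (colG g n).length,
            y = 0 + (j : Int) ∧ (colG g n)[j] = 'O'
        · rw [if_neg (fun hc => hL hc.2), if_pos ⟨hkx, hD⟩]
          obtain ⟨j, hj, hyj, hO⟩ := hD
          have hjH : j < Hn := by rw [hcol_len] at hj; exact hj
          rw [if_pos (by push_cast; omega)]
          unfold tiltedCell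
          have hxn : x.toNat = n := by omega
          have hytn : y.toNat = j := by omega
          rw [hxn, List.getD_eq_getElem _ _ (by rw [tiltP_length, hcol_len]; omega),
            tiltP_getElem _ _ (by rw [hcol_len]; omega)]
          rw [if_neg (by
              intro hc
              apply hL
              rw [show ((y.toNat : Nat) : Int) = y by omega] at hc
              exact hc)]
          rw [if_pos (by simp only [hytn]; exact hO)]
        · rw [if_neg (fun hc => hL hc.2), if_neg (fun hc => hD hc.2), Hget x y,
            if_neg (by omega)]
          by_cases hy : 0 ≤ y ∧ y < (Hn : Int)
          · rw [if_pos (by push_cast; omega)]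
            rw [hget x y (by omega) (by omega) hy.1 hy.2]
            unfold tiltedCell
            have hxn : x.toNat = n := by omega
            rw [hxn]
            rw [List.getD_eq_getElem _ _ (by rw [hcol_len]; omega),
              List.getD_eq_getElem _ _ (by rw [tiltP_length, hcol_len]; omega),
              tiltP_getElem _ _ (by rw [hcol_len]; omega)]
            rw [if_neg (by
                intro hc
                apply hL
                rw [show ((y.toNat : Nat) : Int) = y by omega] at hc
                exact hc)]
            rw [if_neg (by
                intro hc
                exact hD ⟨y.toNat, by rw [hcol_len]; omega, by omega, hc⟩)]
          · rw [if_neg (by push_cast; omega)]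
    · rw [if_neg (fun hc => hkx hc.1), if_neg (fun hc => hkx hc.1), Hget x y]
      by_cases hx : 0 ≤ x ∧ x < (n : Int) ∧ 0 ≤ y ∧ y < (Hn : Int)
      · rw [if_pos hx, if_pos (by push_cast; omega)]
      · rw [if_neg hx, if_neg (by push_cast at hx ⊢; omega)]

theorem roll_spec {d : PySem.Dict (Int × Int) Char} {g : List (List Char)} {Hn Wn : Nat}
    {φ : Int × Int → Option Char} (hinv : InvD d g φ Wn Hn) (hrect : RectG g Hn Wn) :
    (rollA d (Hn : Int) (Wn : Int)).keys.Nodup ∧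
    ∀ x y : Int, (rollA d (Hn : Int) (Wn : Int)).get? (x, y) =
      if 0 ≤ x ∧ x < (Wn : Int) ∧ 0 ≤ y ∧ y < (Hn : Int) then
        some (tiltedCell g x.toNat y.toNat)
      else φ (x, y) := by
  have hget : ∀ x y : Int, 0 ≤ x → x < (Wn : Int) → 0 ≤ y → y < (Hn : Int) →
      d.get? (x, y) = some ((colG g x.toNat).getD y.toNat ' ') := by
    intro x y h1 h2 h3 h4
    rw [hinv.2, if_pos ⟨h1, h2, h3, h4⟩, cellO_eq hrect, if_pos ⟨h1, h2, h3, h4⟩]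
  have hmain := innerRollA hinv.1 hget hrect Wn le_rfl
  have hroll : rollA d (Hn : Int) (Wn : Int) =
      (List.range Wn).foldl (fun target k =>
      ((PySem.List.pyRange 0 (Hn : Int)).foldl
        (fun (st : PySem.Dict (Int × Int) Char × Int) y =>
          let c := d.getD (((k : Nat) : Int), y) ' '
          if c = '#' then (st.1, y + 1)
          else if c = 'O' then
            (if y > st.2 then (st.1.insert (((k : Nat) : Int), y) '.').insert
              (((k : Nat) : Int), st.2) 'O' else st.1, st.2 + 1)
          else st)
        (target, 0)).1) d := by
    unfold rollA
    rw [PySem.List.pyRange_zero_natCast Wn, List.foldl_map]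
  refine ⟨by rw [hroll]; exact hmain.1, ?_⟩
  intro x y
  rw [hroll, hmain.2 x y]
  by_cases hin : 0 ≤ x ∧ x < (Wn : Int) ∧ 0 ≤ y ∧ y < (Hn : Int)
  · rw [if_pos hin, if_pos hin]
  · rw [if_neg hin, if_neg hin, hinv.2, if_neg hin]

theorem foldl_insert_get? (l : List ((Int × Int) × Char)) :
    ∀ (d : PySem.Dict (Int × Int) Char) (k : Int × Int),
    (l.foldl (fun d p => d.insert p.1 p.2) d).get? k =
      ((l.reverse.find? (fun p => p.1 == k)).map (fun p => p.2)).or (d.get? k) := by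
  induction l with
  | nil => intro d k; rfl
  | cons p l ih =>
    intro d k
    rw [List.foldl_cons, ih, List.reverse_cons, List.find?_append]
    rcases hf : l.reverse.find? (fun p => p.1 == k) with _ | q
    · by_cases hpk : p.1 = k
      · rw [List.find?_cons_of_pos (by simpa using hpk)]
        subst hpk
        simp [hf, PySem.Dict.get?_insert_self]
      · rw [List.find?_cons_of_neg (by simpa using hpk)]
        rw [PySem.Dict.get?_insert_of_ne _ _ (fun hc => hpk hc.symm)]
        simp [hf]
    · simp [hf]

theorem find_rev_get? (d : PySem.Dict (Int × Int) Char) (hnd : d.keys.Nodup) (k : Int × Int) :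
    (d.items.reverse.find? (fun p => p.1 == k)).map (fun p => p.2) = d.get? k := by
  rcases hf : d.items.reverse.find? (fun p => p.1 == k) with _ | q
  · rcases hg : d.get? k with _ | v
    · rw [hf]
      rfl
    · exfalso
      rw [List.find?_eq_none] at hf
      have hm : (k, v) ∈ d.items := (PySem.Dict.get?_eq_some_iff_mem_items d k v hnd).mp hg
      have := hf (k, v) (List.mem_reverse.mpr hm)
      simp at this
  · have hq1 : q.1 = k := by simpa using List.find?_some hf
    have hqm : (q.1, q.2) ∈ d.items := by
      simpa using List.mem_reverse.mp (List.mem_of_find?_eq_some hf)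
    have hv : d.get? q.1 = some q.2 := PySem.Dict.get?_of_mem_items d hqm hnd
    rw [hq1] at hv
    rw [hf, hv]
    rfl

theorem rotate_spec {d : PySem.Dict (Int × Int) Char} (hnd : d.keys.Nodup) (Hp : Int) :
    (rotateA d Hp).keys.Nodup ∧
    ∀ x y : Int, (rotateA d Hp).get? (x, y) = d.get? (y, Hp - 1 - x) := by
  constructor
  · exact PySem.Dict.nodup_keys_foldl_insert_key d.items
      (fun p => (Hp - p.1.2 - 1, p.1.1)) (fun _ p => p.2) PySem.Dict.empty
      PySem.Dict.nodup_keys_empty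
  · intro x y
    have hrw : rotateA d Hp =
        (d.items.map (fun p => ((Hp - p.1.2 - 1, p.1.1), p.2))).foldl
          (fun dd q => dd.insert q.1 q.2) PySem.Dict.empty := by
      rw [List.foldl_map]; rfl
    rw [hrw, foldl_insert_get?, PySem.Dict.get?_empty, Option.or_none,
      ← List.map_reverse, List.find?_map]
    have hpred : ((fun p : (Int × Int) × Char => p.1 == ((x, y) : Int × Int)) ∘
        (fun p : (Int × Int) × Char => ((Hp - p.1.2 - 1, p.1.1), p.2))) =
        fun p : (Int × Int) × Char => p.1 == ((y, Hp - 1 - x) : Int × Int) := by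
      funext p
      simp only [Function.comp_apply]
      rw [Bool.eq_iff_iff]
      simp only [beq_iff_eq, Prod.mk.injEq, Prod.ext_iff]
      constructor
      · rintro ⟨h1, h2⟩; exact ⟨h2, by omega⟩
      · rintro ⟨h1, h2⟩; exact ⟨by omega, h1⟩
    rw [hpred, Option.map_map]
    have : ((fun p : (Int × Int) × Char => p.2) ∘
        (fun p : (Int × Int) × Char => ((Hp - p.1.2 - 1, p.1.1), p.2))) =
        (fun p : (Int × Int) × Char => p.2) := rfl
    rw [this, find_rev_get? d hnd]

theorem colG_getD (m : List (List Char)) (x y : Nat) (hy : y < m.length) :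
    (colG m x).getD y ' ' = (m[y]).getD x ' ' := by
  have hl : y < (colG m x).length := by simpa [colG] using hy
  rw [List.getD_eq_getElem _ _ hl]
  simp [colG]

/-- One tilt-north-then-rotate-clockwise step, as B's spin performs it. -/
def stepB (g : List (List Char)) : List (List Char) :=
  (zipStarB g).map (fun col => (tiltP col).reverse)

def cycleB (g : List (List Char)) : List (List Char) :=
  stepB (stepB (stepB (stepB g)))

theorem spinP_eq (g : List (List Char)) : spinP g = cycleB g := by
  rw [spinP, show PySem.List.pyRange 0 4 = [0, 1, 2, 3] from by decide]
  rfl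

theorem zipStarGo_rect : ∀ (Wn : Nat) (g : List (List Char)), g ≠ [] →
    (∀ r ∈ g, r.length = Wn) → zipStarGo Wn g = (List.range Wn).map (colG g) := by
  intro Wn
  induction Wn with
  | zero => intro g _ _; simp [zipStarGo]
  | succ n ih =>
    intro g hne hl
    have hie : g.isEmpty = false := by simpa [List.isEmpty_iff] using hne
    have hany : g.any List.isEmpty = false := by
      rw [List.any_eq_false]
      intro r hr
      have hrl := hl r hr
      simp only [List.isEmpty_iff]
      intro hc
      rw [hc] at hrl
      simp at hrl
    rw [zipStarGo]
    simp only [hie, hany, Bool.or_self, Bool.false_eq_true, if_false]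
    rw [List.range_succ_eq_map, List.map_cons, List.map_map]
    congr 1
    · apply List.map_congr_left
      intro r _
      cases r <;> rfl
    · have hne' : g.map List.tail ≠ [] := by simpa using hne
      have hl' : ∀ r ∈ g.map List.tail, r.length = n := by
        intro r hr
        obtain ⟨r0, hr0, rfl⟩ := List.mem_map.mp hr
        have := hl r0 hr0
        simp [this]
      rw [ih (g.map List.tail) hne' hl']
      apply List.map_congr_left
      intro k _
      simp only [Function.comp_apply, colG, List.map_map]
      apply List.map_congr_left
      intro r hr
      have hrl := hl r hr
      cases r with
      | nil => simp at hrl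
      | cons a t => rfl

theorem zipStar_rect {g : List (List Char)} {Hn Wn : Nat} (hrect : RectG g Hn Wn)
    (hH : 0 < Hn) : zipStarB g = (List.range Wn).map (colG g) := by
  obtain ⟨hlen, hrow⟩ := hrect
  cases g with
  | nil => exfalso; rw [← hlen] at hH; simp at hH
  | cons r t =>
    unfold zipStarB
    simp only [List.headD_cons]
    rw [hrow r List.mem_cons_self]
    exact zipStarGo_rect Wn (r :: t) (by simp) hrow

theorem stepB_rect {g : List (List Char)} {Hn Wn : Nat} (hrect : RectG g Hn Wn)
    (hH : 0 < Hn) : RectG (stepB g) Wn Hn := by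
  unfold stepB
  rw [zipStar_rect hrect hH]
  constructor
  · simp
  · intro r hr
    rw [List.map_map] at hr
    obtain ⟨x, _, rfl⟩ := List.mem_map.mp hr
    simp [tiltP_length, colG, hrect.1]

theorem quarter_spec {d : PySem.Dict (Int × Int) Char} {g : List (List Char)} {Hn Wn : Nat}
    {φ : Int × Int → Option Char} (hinv : InvD d g φ Wn Hn) (hrect : RectG g Hn Wn)
    (hH : 0 < Hn) (hW : 0 < Wn) :
    InvD (rotateA (rollA d (Hn : Int) (Wn : Int)) (Hn : Int)) (stepB g)
      (fun p => φ (p.2, (Hn : Int) - 1 - p.1)) Hn Wn ∧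
      RectG (stepB g) Wn Hn := by
  have hroll := roll_spec hinv hrect
  have hrot := rotate_spec hroll.1 (Hn : Int)
  have hsrect := stepB_rect hrect hH
  refine ⟨⟨hrot.1, ?_⟩, hsrect⟩
  intro x y
  rw [hrot.2 x y, hroll.2 y ((Hn : Int) - 1 - x)]
  by_cases hin : 0 ≤ x ∧ x < (Hn : Int) ∧ 0 ≤ y ∧ y < (Wn : Int)
  · rw [if_pos (by omega), if_pos hin, cellO_eq hsrect x y, if_pos hin]
    congr 1
    have hyW : y.toNat < Wn := by omega
    have hxH : x.toNat < Hn := by omega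
    have hsl : (stepB g).length = Wn := by
      unfold stepB
      rw [zipStar_rect hrect hH]
      simp
    rw [colG_getD _ _ _ (by rw [hsl]; omega)]
    have hrowy : (stepB g)[y.toNat]'(by rw [hsl]; omega) =
        (tiltP (colG g y.toNat)).reverse := by
      simp only [stepB, zipStar_rect hrect hH, List.map_map, List.getElem_map,
        Function.comp_apply, List.getElem_range]
    rw [hrowy]
    have hlent : (tiltP (colG g y.toNat)).length = Hn := by
      rw [tiltP_length]; simp [colG, hrect.1]
    have hxb : x.toNat < (tiltP (colG g y.toNat)).reverse.length := by
      rw [List.length_reverse, hlent]; omega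
    rw [List.getD_eq_getElem _ _ hxb, List.getElem_reverse]
    unfold tiltedCell
    rw [List.getD_eq_getElem _ _ (by rw [hlent]; omega)]
    congr 1
    rw [hlent]
    omega
  · rw [if_neg (by omega), if_neg hin]

theorem invd_phi_congr {d : PySem.Dict (Int × Int) Char} {g : List (List Char)}
    {φ1 φ2 : Int × Int → Option Char} {Wn Hn : Nat}
    (h : ∀ p : Int × Int, φ1 p = φ2 p) (hi : InvD d g φ1 Wn Hn) : InvD d g φ2 Wn Hn := by
  refine ⟨hi.1, ?_⟩
  intro x y
  rw [hi.2 x y]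
  by_cases hin : 0 ≤ x ∧ x < (Wn : Int) ∧ 0 ≤ y ∧ y < (Hn : Int)
  · rw [if_pos hin, if_pos hin]
  · rw [if_neg hin, if_neg hin, h]

theorem cycle_spec {d : PySem.Dict (Int × Int) Char} {g : List (List Char)} {Hn Wn : Nat}
    {φ : Int × Int → Option Char} (hinv : InvD d g φ Wn Hn) (hrect : RectG g Hn Wn)
    (hH : 0 < Hn) (hW : 0 < Wn) :
    InvD (cycleA (Hn : Int) (Wn : Int) d) (cycleB g) φ Wn Hn ∧ RectG (cycleB g) Hn Wn := by
  obtain ⟨i1, r1⟩ := quarter_spec hinv hrect hH hW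
  obtain ⟨i2, r2⟩ := quarter_spec i1 r1 hW hH
  obtain ⟨i3, r3⟩ := quarter_spec i2 r2 hH hW
  obtain ⟨i4, r4⟩ := quarter_spec i3 r3 hW hH
  refine ⟨invd_phi_congr ?_ i4, r4⟩
  intro p
  simp only
  congr 1
  rw [Prod.ext_iff]
  constructor <;> simp <;> ring

theorem mem_keys_iff_isSome {d : PySem.Dict (Int × Int) Char} (k : Int × Int) :
    k ∈ d.keys ↔ (d.get? k).isSome = true := by
  rw [← PySem.Dict.contains_iff_mem_keys, PySem.Dict.contains_eq_isSome_get?]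

theorem size_eq_of {d1 d2 : PySem.Dict (Int × Int) Char} (h1 : d1.keys.Nodup)
    (h2 : d2.keys.Nodup) (h : ∀ k : Int × Int, (d1.get? k).isSome = (d2.get? k).isSome) :
    d1.size = d2.size := by
  have hperm : d1.keys.Perm d2.keys := (List.perm_ext_iff_of_nodup h1 h2).mpr (fun k => by
    rw [mem_keys_iff_isSome, mem_keys_iff_isSome, h k])
  have hl := hperm.length_eq
  simpa [PySem.Dict.size, PySem.Dict.keys] using hl

theorem cell_get {d : PySem.Dict (Int × Int) Char} {g : List (List Char)} {Hn Wn : Nat}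
    {φ : Int × Int → Option Char} (hinv : InvD d g φ Wn Hn) (hrect : RectG g Hn Wn)
    (x y : Nat) (hy : y < g.length)
    (hx : x < (g[y]).length) : d.get? ((x : Int), (y : Int)) = some (g[y][x]) := by
  have hxW : x < Wn := by
    have := hrect.2 _ (List.getElem_mem hy)
    omega
  have hyH : y < Hn := by
    have := hrect.1
    omega
  rw [hinv.2, if_pos (by push_cast; omega)]
  unfold cellO
  rw [if_pos (by omega)]
  simp only [Int.toNat_natCast]
  rw [List.getElem?_eq_getElem hy]
  simp only [Option.bind_some]
  rw [List.getElem?_eq_getElem hx]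

theorem dictEq_iff {d1 d2 : PySem.Dict (Int × Int) Char} {g1 g2 : List (List Char)}
    {Hn Wn : Nat} {φ : Int × Int → Option Char} (h1 : InvD d1 g1 φ Wn Hn)
    (h2 : InvD d2 g2 φ Wn Hn) (hr1 : RectG g1 Hn Wn)
    (hr2 : RectG g2 Hn Wn) : pyDictEqA d1 d2 = true ↔ g1 = g2 := by
  constructor
  · intro hEq
    rw [pyDictEqA, Bool.and_eq_true, List.all_eq_true] at hEq
    apply List.ext_getElem (by rw [hr1.1, hr2.1])
    intro y hy1 hy2
    apply List.ext_getElem (by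
      rw [hr1.2 _ (List.getElem_mem hy1), hr2.2 _ (List.getElem_mem hy2)])
    intro x hx1 hx2
    have hc1 : d1.get? ((x : Int), (y : Int)) = some (g1[y][x]) := cell_get h1 hr1 x y hy1 hx1
    have hmem : (((x : Int), (y : Int)), g1[y][x]) ∈ d1.items :=
      (PySem.Dict.get?_eq_some_iff_mem_items d1 _ _ h1.1).mp hc1
    have hb := hEq.2 _ hmem
    rw [beq_iff_eq] at hb
    have hc2 : d2.get? ((x : Int), (y : Int)) = some (g2[y][x]) := cell_get h2 hr2 x y hy2 hx2
    rw [hc2] at hb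
    exact (Option.some.injEq _ _ ▸ hb).symm
  · intro hgg
    rw [pyDictEqA, Bool.and_eq_true, List.all_eq_true]
    have hsame : ∀ k : Int × Int, d1.get? k = d2.get? k := by
      intro k
      obtain ⟨kx, ky⟩ := k
      rw [h1.2 kx ky, h2.2 kx ky]
      by_cases hin : 0 ≤ kx ∧ kx < (Wn : Int) ∧ 0 ≤ ky ∧ ky < (Hn : Int)
      · rw [if_pos hin, if_pos hin, hgg]
      · rw [if_neg hin, if_neg hin]
    constructor
    · rw [beq_iff_eq]
      exact size_eq_of h1.1 h2.1 (fun k => by rw [hsame k])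
    · intro p hp
      have hp' : (p.1, p.2) ∈ d1.items := by simpa using hp
      have : d1.get? p.1 = some p.2 := PySem.Dict.get?_of_mem_items d1 hp' h1.1
      rw [beq_iff_eq, ← hsame, this]

/-- First index of `g` in `l`, as Python's `list.index`. -/
def firstIdx (g : List (List Char)) : List (List (List Char)) → Option Int
  | [] => none
  | h :: t => if g = h then some 0 else (firstIdx g t).map (· + 1)

theorem index_corr {Hn Wn : Nat} {g' : List (List Char)} {φ : Int × Int → Option Char}
    {d' : PySem.Dict (Int × Int) Char} (hinv : InvD d' g' φ Wn Hn)
    (hrect : RectG g' Hn Wn) :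
    ∀ {statesA : List (PySem.Dict (Int × Int) Char)} {statesB : List (List (List Char))},
    List.Forall₂ (fun d g => InvD d g φ Wn Hn ∧ RectG g Hn Wn) statesA statesB →
    indexA d' statesA = firstIdx g' statesB := by
  intro statesA statesB h
  induction h with
  | nil => rfl
  | @cons d0 g0 lA lB hrel _ ihh =>
    simp only [indexA, firstIdx]
    have hiff : pyDictEqA d' d0 = true ↔ g' = g0 := dictEq_iff hinv hrel.1 hrect hrel.2
    by_cases hb : g' = g0
    · rw [if_pos (hiff.mpr hb), if_pos hb]
    · rw [if_neg (fun hc => hb (hiff.mp hc)), if_neg hb, ihh]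

theorem seen_get_corr (g' : List (List Char)) :
    ∀ (statesB : List (List (List Char))) (s : Int)
      (seen : PySem.Dict (List (List Char)) Int),
    seen.items = (PySem.List.enumerate statesB s).map (fun p => (p.2, p.1)) →
    seen.get? g' = (firstIdx g' statesB).map (· + s) := by
  intro statesB
  induction statesB with
  | nil =>
    intro s seen h
    rw [get?_eq_find, h]
    simp [firstIdx, PySem.List.enumerate_nil]
  | cons g0 t ih =>
    intro s seen h
    rw [get?_eq_find, h]
    simp only [PySem.List.enumerate_cons, List.map_cons, firstIdx]
    by_cases hb : g' = g0
    · rw [List.find?_cons_of_pos (by simpa using hb.symm)]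
      rw [if_pos hb]
      simp
    · rw [List.find?_cons_of_neg (by simpa using fun hc => hb hc.symm)]
      rw [if_neg hb]
      have := ih (s + 1) (PySem.Dict.mk ((PySem.List.enumerate t (s + 1)).map
        (fun p => (p.2, p.1)))) rfl
      rw [get?_eq_find] at this
      rw [this]
      rcases firstIdx g' t with _ | j
      · rfl
      · simp only [Option.map_some]
        congr 1
        omega

theorem firstIdx_lt {g' : List (List Char)} : ∀ {l : List (List (List Char))} {j : Int},
    firstIdx g' l = some j → 0 ≤ j ∧ j < (l.length : Int) ∧ l[j.toNat]? = some g' := by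
  intro l
  induction l with
  | nil => intro j h; simp [firstIdx] at h
  | cons h0 t ih =>
    intro j h
    simp only [firstIdx] at h
    by_cases hb : g' = h0
    · rw [if_pos hb] at h
      have hj : j = 0 := by
        have := Option.some.inj h
        omega
      subst hj
      refine ⟨le_refl 0, by simp, by simp [hb]⟩
    · rw [if_neg hb] at h
      rcases ho : firstIdx g' t with _ | j'
      · rw [ho] at h; simp at h
      · rw [ho] at h
        simp only [Option.map_some] at h
        have hj : j = j' + 1 := (Option.some.inj h).symm
        subst hj
        obtain ⟨b1, b2, b3⟩ := ih ho
        refine ⟨by omega, by rw [List.length_cons]; push_cast; omega, ?_⟩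
        have : (j' + 1).toNat = j'.toNat + 1 := by omega
        rw [this, List.getElem?_cons_succ]
        exact b3

theorem pyGetD_toNat {cs : List Char} {j : Int} (h0 : 0 ≤ j) (h1 : j < (cs.length : Int)) :
    PySem.List.pyGetD cs j ' ' = cs.getD j.toNat ' ' := by
  rw [PySem.List.pyGetD_eq_getElem _ _ h0 h1, List.getD_eq_getElem _ _ (by omega)]

theorem read_eq {d : PySem.Dict (Int × Int) Char} {g : List (List Char)} {Hn Wn : Nat}
    {φ : Int × Int → Option Char} (hinv : InvD d g φ Wn Hn) (hrect : RectG g Hn Wn)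
    {x y : Int}
    (hx : 0 ≤ x ∧ x < (Wn : Int)) (hy : 0 ≤ y ∧ y < (Hn : Int)) :
    d.getD (x, y) ' ' = (colG g x.toNat).getD y.toNat ' ' := by
  rw [PySem.Dict.getD_eq_get?_getD, hinv.2, if_pos ⟨hx.1, hx.2, hy.1, hy.2⟩,
    cellO_eq hrect, if_pos ⟨hx.1, hx.2, hy.1, hy.2⟩, Option.getD_some]

theorem enum_sum {α : Type} (xs : List α) (dflt : α) (f : Int × α → Int) :
    ((PySem.List.enumerate xs).map f).sum =
      ∑ j ∈ Finset.range xs.length, f (((j : Nat) : Int), xs.getD j dflt) := by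
  have h : (PySem.List.enumerate xs).map f =
      (List.range xs.length).map (fun j : Nat => f (((j : Nat) : Int), xs.getD j dflt)) := by
    apply List.ext_getElem (by simp [PySem.List.length_enumerate])
    intro j h1 h2
    rw [List.getElem_map, List.getElem_map, PySem.List.getElem_enumerate, List.getElem_range]
    rw [List.getD_eq_getElem _ _ (by
      simpa [PySem.List.length_enumerate] using h1)]
    norm_num
  rw [h]
  rfl

theorem map_sum_range (row : List Char) (h : Char → Int) :
    (row.map h).sum = ∑ x ∈ Finset.range row.length, h (row.getD x ' ') := by
  have e : row.map h = (List.range row.length).map (fun x => h (row.getD x ' ')) := by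
    apply List.ext_getElem (by simp)
    intro j h1 h2
    rw [List.getElem_map, List.getElem_map, List.getElem_range,
      List.getD_eq_getElem _ _ (by simpa using h1)]
  rw [e]
  rfl

theorem loadA_col {d : PySem.Dict (Int × Int) Char} {g : List (List Char)} {Hn Wn : Nat}
    {φ : Int × Int → Option Char} (hinv : InvD d g φ Wn Hn) (hrect : RectG g Hn Wn)
    (x : Int) (hx : 0 ≤ x ∧ x < (Wn : Int))
    (L : Int) :
    (PySem.List.pyRange 0 (Hn : Int)).foldl
      (fun load y => if d.getD (x, y) ' ' = 'O' then load + ((Hn : Int) - y) else load) L =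
    L + ((PySem.List.enumerate (colG g x.toNat) 0).map
      (fun yc => if yc.2 = 'O' then (Hn : Int) - yc.1 else 0)).sum := by
  have hcl : (colG g x.toNat).length = Hn := by simp [colG, hrect.1]
  have h1 : (PySem.List.pyRange 0 (Hn : Int)).foldl
      (fun load y => if d.getD (x, y) ' ' = 'O' then load + ((Hn : Int) - y) else load) L =
      (PySem.List.enumerate (colG g x.toNat) 0).foldl
        (fun load yc => if yc.2 = 'O' then load + ((Hn : Int) - yc.1) else load) L := by
    rw [PySem.List.enumerate_eq_map_pyRange (colG g x.toNat) ' ', List.foldl_map]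
    rw [show PySem.List.len (colG g x.toNat) = ((Hn : Nat) : Int) by
      rw [PySem.List.len_eq, hcl]]
    refine (PySem.List.foldl_congr_mem _ _ _ _ ?_).symm
    intro acc y hy
    rw [PySem.List.mem_pyRange_one] at hy
    rw [pyGetD_toNat hy.1 (by rw [hcl]; exact_mod_cast hy.2),
      ← read_eq hinv hrect hx (by exact ⟨hy.1, by exact_mod_cast hy.2⟩)]
  rw [h1, PySem.List.foldl_congr_mem _ _
    (fun load yc => load + (if yc.2 = 'O' then (Hn : Int) - yc.1 else 0)) _
    (fun acc yc _ => by by_cases h : yc.2 = 'O' <;> simp [h])]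
  rw [PySem.List.foldl_add]

theorem row_count_sum (row : List Char) (v : Int) :
    (row.map (fun c => if c = 'O' then v else 0)).sum = v * (row.count 'O' : Int) := by
  induction row with
  | nil => simp
  | cons c t ih =>
    simp only [List.map_cons, List.sum_cons, ih, List.count_cons]
    by_cases hc : c = 'O'
    · simp only [hc, if_pos rfl, beq_self_eq_true]
      push_cast
      ring
    · rw [if_neg hc, show ((c == 'O') = false) from by simpa using hc]
      simp

theorem load_corr {d : PySem.Dict (Int × Int) Char} {g : List (List Char)} {Hn Wn : Nat}
    {φ : Int × Int → Option Char} (hinv : InvD d g φ Wn Hn) (hrect : RectG g Hn Wn) :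
    getLoadA d (Hn : Int) (Wn : Int) = loadP (Hn : Int) g := by
  have hgl : g.length = Hn := hrect.1
  unfold getLoadA loadP
  rw [PySem.List.foldl_congr_mem _ _
    (fun load x => load + ((PySem.List.enumerate (colG g x.toNat) 0).map
      (fun yc => if yc.2 = 'O' then (Hn : Int) - yc.1 else 0)).sum) _
    (fun acc x hx => loadA_col hinv hrect x (PySem.List.mem_pyRange_one.mp hx) acc)]
  rw [PySem.List.foldl_add, zero_add]
  rw [PySem.List.pyRange_zero_natCast Wn, List.map_map]
  have hA : ((List.range Wn).map ((fun x : Int =>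
      ((PySem.List.enumerate (colG g x.toNat) 0).map
        (fun yc => if yc.2 = 'O' then (Hn : Int) - yc.1 else 0)).sum) ∘
      (fun k : Nat => (k : Int)))).sum =
      ∑ x ∈ Finset.range Wn, ∑ y ∈ Finset.range Hn,
        (if (g.getD y []).getD x ' ' = 'O' then (Hn : Int) - (↑y : Int) else 0) := by
    show ∑ x ∈ Finset.range Wn, _ = _
    apply Finset.sum_congr rfl
    intro x hx
    simp only [Function.comp_apply, Int.toNat_natCast]
    rw [enum_sum (colG g x) ' '
      (fun yc => if yc.2 = 'O' then (Hn : Int) - yc.1 else 0)]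
    rw [show (colG g x).length = Hn from by simp [colG, hgl]]
    apply Finset.sum_congr rfl
    intro y hy
    rw [colG_getD _ _ _ (by rw [hgl]; exact Finset.mem_range.mp hy)]
    rw [show g.getD y [] = g[y]'(by rw [hgl]; exact Finset.mem_range.mp hy) from
      List.getD_eq_getElem _ _ (by rw [hgl]; exact Finset.mem_range.mp hy)]
  rw [hA, Finset.sum_comm]
  rw [enum_sum g [] (fun yr => ((Hn : Int) - yr.1) * (PySem.Chars.count yr.2 ['O'] : Int))]
  rw [hgl]
  apply Finset.sum_congr rfl
  intro y hy
  have hyl : y < g.length := by rw [hgl]; exact Finset.mem_range.mp hy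
  have hrowlen : (g.getD y []).length = Wn := by
    rw [List.getD_eq_getElem _ _ hyl]
    exact hrect.2 _ (List.getElem_mem hyl)
  rw [count_single, ← row_count_sum (g.getD y []) ((Hn : Int) - (y : Int)),
    map_sum_range, hrowlen]

theorem forall2_append_one {α β : Type} {R : α → β → Prop} :
    ∀ {l1 : List α} {l2 : List β} {a : α} {b : β},
    List.Forall₂ R l1 l2 → R a b → List.Forall₂ R (l1 ++ [a]) (l2 ++ [b]) := by
  intro l1 l2 a b h hab
  induction h with
  | nil => exact List.forall₂_cons.mpr ⟨hab, List.Forall₂.nil⟩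
  | cons hx _ ih => exact List.forall₂_cons.mpr ⟨hx, ih⟩

theorem foldl_const_iterate {α : Type} (f : α → α) :
    ∀ (l : List Int) (a : α), l.foldl (fun a _ => f a) a = f^[l.length] a := by
  intro l
  induction l with
  | nil => intro a; simp
  | cons x t ih =>
    intro a
    rw [List.foldl_cons, ih, List.length_cons, Function.iterate_succ_apply]

theorem loop_corr {Hn Wn : Nat} (hH : 0 < Hn) (hW : 0 < Wn)
    (φ : Int × Int → Option Char) (g0 : List (List Char)) :
    ∀ (fuel iN : Nat), 1 ≤ iN →
    ∀ (statesA : List (PySem.Dict (Int × Int) Char))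
      (seen : PySem.Dict (List (List Char)) Int)
      (d : PySem.Dict (Int × Int) Char) (gprev : List (List Char)),
    List.Forall₂ (fun d g => InvD d g φ Wn Hn ∧ RectG g Hn Wn) statesA
      ((List.range iN).map (fun m => cycleB^[m] g0)) →
    InvD d gprev φ Wn Hn → RectG gprev Hn Wn → gprev = cycleB^[iN - 1] g0 →
    seen.items = (PySem.List.enumerate
      ((List.range iN).map (fun m => cycleB^[m] g0))).map (fun p => (p.2, p.1)) →
    loopA fuel (iN : Int) (Hn : Int) (Wn : Int) statesA d =
      loopP fuel (iN : Int) seen (cycleB gprev) g0 (Hn : Int) := by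
  intro fuel
  induction fuel with
  | zero => intros; rfl
  | succ f ihf =>
    intro iN hiN statesA seen d gprev hF hI hR hgp hseen
    obtain ⟨hI', hR'⟩ := cycle_spec hI hR hH hW
    simp only [loopA, loopP]
    have hidx : indexA (cycleA (Hn : Int) (Wn : Int) d) statesA =
        firstIdx (cycleB gprev) ((List.range iN).map (fun m => cycleB^[m] g0)) :=
      index_corr hI' hR' hF
    have hsg : seen.get? (cycleB gprev) =
        firstIdx (cycleB gprev) ((List.range iN).map (fun m => cycleB^[m] g0)) := by
      rw [seen_get_corr _ _ 0 seen hseen]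
      rcases firstIdx (cycleB gprev) ((List.range iN).map (fun m => cycleB^[m] g0)) with _ | j
      · rfl
      · simp
    rw [hidx, hsg]
    rcases hfi : firstIdx (cycleB gprev) ((List.range iN).map (fun m => cycleB^[m] g0))
      with _ | j
    · -- not seen yet: continue with one more state
      simp only
      have hg' : cycleB gprev = cycleB^[iN] g0 := by
        rw [hgp]
        conv_rhs => rw [show iN = (iN - 1) + 1 from by omega]
        exact (Function.iterate_succ_apply' cycleB (iN - 1) g0).symm
      have hsB : (List.range (iN + 1)).map (fun m => cycleB^[m] g0) =
          (List.range iN).map (fun m => cycleB^[m] g0) ++ [cycleB^[iN] g0] := by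
        rw [List.range_succ, List.map_append, List.map_cons, List.map_nil]
      have hcast : (iN : Int) + 1 = ((iN + 1 : Nat) : Int) := by push_cast; ring
      rw [hcast, spinP_eq]
      apply ihf (iN + 1) (by omega)
      · rw [hsB, ← hg']
        exact forall2_append_one hF ⟨hI', hR'⟩
      · exact hI'
      · exact hR'
      · rw [hg']
        congr 1
      · rw [PySem.Dict.items_insert_of_not_contains _ _ (by
          rw [PySem.Dict.contains_eq_isSome_get?, hsg, hfi]
          rfl)]
        rw [hseen, hsB, PySem.List.enumerate_append, List.map_append]
        congr 1
        simp only [PySem.List.enumerate_cons, PySem.List.enumerate_nil, List.map_cons,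
          List.map_nil]
        rw [show (0 : Int) + (((List.range iN).map (fun m => cycleB^[m] g0)).length : Int) =
          (iN : Int) from by simp]
        rw [hg']
    · -- repeat found at index j
      simp only
      obtain ⟨hj0, hjlen, hjget⟩ := firstIdx_lt hfi
      have hlenB : ((List.range iN).map (fun m => cycleB^[m] g0)).length = iN := by simp
      have hlenA : statesA.length = iN := by rw [hF.length_eq, hlenB]
      rw [hlenB] at hjlen
      have hij : j < (iN : Int) := hjlen
      have hpos : 0 < (iN : Int) - j := by omega
      have hk0 : 0 ≤ PySem.Int.mod (1000000000 - j) ((iN : Int) - j) + j := by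
        have := PySem.Int.mod_nonneg (1000000000 - j) hpos
        omega
      have hki : PySem.Int.mod (1000000000 - j) ((iN : Int) - j) + j < (iN : Int) := by
        have := PySem.Int.mod_lt (1000000000 - j) hpos
        omega
      set kk := PySem.Int.mod (1000000000 - j) ((iN : Int) - j) + j with hkk
      have hklt : kk.toNat < iN := by omega
      have hrepl : (PySem.List.pyRange 0 kk).foldl (fun g _ => spinP g) g0 =
          cycleB^[kk.toNat] g0 := by
        rw [PySem.List.foldl_congr_mem _ _ (fun g _ => cycleB g) _
          (fun acc x _ => spinP_eq acc)]
        rw [foldl_const_iterate, PySem.List.length_pyRange_one]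
        congr 1
        omega
      rw [hrepl]
      rw [PySem.List.pyGetD_eq_getElem _ _ hk0 (by rw [hlenA]; exact_mod_cast hki)]
      have hrel := List.Forall₂.get hF (i := kk.toNat)
        (by rw [hlenA]; exact hklt) (by rw [hlenB]; exact hklt)
      simp only [List.get_eq_getElem] at hrel
      have hgetB : ((List.range iN).map (fun m => cycleB^[m] g0))[kk.toNat]'(by
          rw [hlenB]; exact hklt) = cycleB^[kk.toNat] g0 := by
        simp
      rw [hgetB] at hrel
      exact load_corr hrel.1 hrel.2

theorem cellO_eq_some {g : List (List Char)} {x y : Int} {c : Char}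
    (h : cellO g x y = some c) :
    0 ≤ x ∧ 0 ≤ y ∧ ∃ (hy : y.toNat < g.length) (hx : x.toNat < (g[y.toNat]).length),
      g[y.toNat][x.toNat] = c := by
  unfold cellO at h
  by_cases h0 : 0 ≤ x ∧ 0 ≤ y
  · rw [if_pos h0] at h
    rcases hge : g[y.toNat]? with _ | row
    · rw [hge] at h
      simp at h
    · rw [hge] at h
      simp only [Option.bind_some] at h
      have hy : y.toNat < g.length := (List.getElem?_eq_some_iff.mp hge).1
      have hrow : g[y.toNat] = row := by
        have := List.getElem?_eq_some_iff.mp hge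
        exact this.2
      rcases hxe : row[x.toNat]? with _ | cc
      · rw [hxe] at h
        simp at h
      · rw [hxe] at h
        have hx : x.toNat < row.length := (List.getElem?_eq_some_iff.mp hxe).1
        refine ⟨h0.1, h0.2, hy, by rw [hrow]; exact hx, ?_⟩
        have := (List.getElem?_eq_some_iff.mp hxe).2
        simp only [hrow]
        rw [this]
        exact Option.some.inj h
  · rw [if_neg h0] at h
    simp at h

theorem init_spec {lines : List String} (hp : Pre_part_2 lines) :
    InvD ((PySem.List.enumerate lines).foldl
      (fun d yl =>
        (PySem.List.enumerate yl.2.toList).foldl (fun d xc => d.insert (xc.1, yl.1) xc.2) d)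
      PySem.Dict.empty)
      (lines.map (fun l => l.toList.take (lines.headD "").toList.length))
      (fun p => ((PySem.List.enumerate lines).foldl
        (fun d yl =>
          (PySem.List.enumerate yl.2.toList).foldl
            (fun d xc => d.insert (xc.1, yl.1) xc.2) d)
        PySem.Dict.empty).get? p)
      (lines.headD "").toList.length lines.length ∧
    RectG (lines.map (fun l => l.toList.take (lines.headD "").toList.length))
      lines.length (lines.headD "").toList.length := by
  obtain ⟨hne, hlens⟩ := hp
  have hrows : ∀ l ∈ lines, (lines.headD "").toList.length ≤ l.toList.length := by
    intro l hl
    have := hlens l hl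
    rw [PySem.Str.len_eq, PySem.Str.len_eq] at this
    exact_mod_cast this
  have hrect : RectG (lines.map (fun l => l.toList.take (lines.headD "").toList.length))
      lines.length (lines.headD "").toList.length := by
    constructor
    · simp
    · intro r hr
      obtain ⟨l, hl, rfl⟩ := List.mem_map.mp hr
      rw [List.length_take]
      exact Nat.min_eq_left (hrows l hl)
  have hval : ∀ (xn yn : Nat) (hy : yn < lines.length) (_ : xn < lines[yn].toList.length),
      cellO (lines.map String.toList) (xn : Int) (yn : Int) = some (lines[yn].toList[xn]) := by
    intro xn yn hy hx
    unfold cellO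
    rw [if_pos (by omega)]
    simp only [Int.toNat_natCast]
    rw [List.getElem?_eq_getElem (by simpa using hy)]
    simp only [Option.bind_some, List.getElem_map]
    rw [List.getElem?_eq_getElem hx]
  have hflat : (PySem.List.enumerate lines).foldl
      (fun d yl =>
        (PySem.List.enumerate yl.2.toList).foldl (fun d xc => d.insert (xc.1, yl.1) xc.2) d)
      PySem.Dict.empty =
      ((PySem.List.enumerate lines).flatMap (fun yl =>
        (PySem.List.enumerate yl.2.toList).map (fun xc => ((xc.1, yl.1), xc.2)))).foldl
        (fun d p => d.insert p.1 p.2) PySem.Dict.empty := by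
    rw [List.foldl_flatMap]
    simp only [List.foldl_map]
  have hFLAT : ∀ (k : Int × Int) (c : Char),
      ((k, c) ∈ (PySem.List.enumerate lines).flatMap (fun yl =>
        (PySem.List.enumerate yl.2.toList).map (fun xc => ((xc.1, yl.1), xc.2)))) ↔
      cellO (lines.map String.toList) k.1 k.2 = some c := by
    intro k c
    rw [List.mem_flatMap]
    constructor
    · rintro ⟨yl, hyl, hin⟩
      obtain ⟨yn, hyn, rfl⟩ := (PySem.List.mem_enumerate_iff lines 0 yl).mp hyl
      obtain ⟨xc, hxc, heq⟩ := List.mem_map.mp hin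
      obtain ⟨xn, hxn, rfl⟩ :=
        (PySem.List.mem_enumerate_iff lines[yn].toList 0 xc).mp hxc
      rw [Prod.mk.injEq] at heq
      obtain ⟨hk, hc⟩ := heq
      rw [← hk, ← hc]
      simp only [zero_add]
      exact hval xn yn hyn hxn
    · intro h
      obtain ⟨hx0, hy0, hy, hx, hc⟩ := cellO_eq_some h
      have hy' : k.2.toNat < lines.length := by simpa using hy
      have hx' : k.1.toNat < lines[k.2.toNat].toList.length := by
        have := hx
        simpa using this
      refine ⟨((0 : Int) + (k.2.toNat : Int), lines[k.2.toNat]'hy'), ?_, ?_⟩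
      · exact (PySem.List.mem_enumerate_iff lines 0 _).mpr ⟨k.2.toNat, hy', rfl⟩
      · refine List.mem_map.mpr
          ⟨((0 : Int) + (k.1.toNat : Int), lines[k.2.toNat].toList[k.1.toNat]), ?_, ?_⟩
        · exact (PySem.List.mem_enumerate_iff lines[k.2.toNat].toList 0 _).mpr
            ⟨k.1.toNat, hx', rfl⟩
        · rw [Prod.mk.injEq]
          constructor
          · rw [Prod.ext_iff]
            constructor
            · show (0 : Int) + (k.1.toNat : Int) = k.1
              omega
            · show (0 : Int) + (k.2.toNat : Int) = k.2
              omega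
          · rw [← hc]
            simp
  have hnd : ((PySem.List.enumerate lines).foldl
      (fun d yl =>
        (PySem.List.enumerate yl.2.toList).foldl (fun d xc => d.insert (xc.1, yl.1) xc.2) d)
      PySem.Dict.empty).keys.Nodup := by
    rw [hflat]
    exact PySem.Dict.nodup_keys_foldl_insert_key
      (l := (PySem.List.enumerate lines).flatMap (fun yl =>
        (PySem.List.enumerate yl.2.toList).map (fun xc => ((xc.1, yl.1), xc.2))))
      (key := fun p => p.1) (f := fun _ p => p.2) PySem.Dict.empty
      PySem.Dict.nodup_keys_empty
  have hfull : ∀ x y : Int, ((PySem.List.enumerate lines).foldl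
      (fun d yl =>
        (PySem.List.enumerate yl.2.toList).foldl (fun d xc => d.insert (xc.1, yl.1) xc.2) d)
      PySem.Dict.empty).get? (x, y) = cellO (lines.map String.toList) x y := by
    intro x y
    rw [hflat, foldl_insert_get?, PySem.Dict.get?_empty, Option.or_none]
    rcases hc : cellO (lines.map String.toList) x y with _ | c
    · rcases hf : ((PySem.List.enumerate lines).flatMap (fun yl =>
          (PySem.List.enumerate yl.2.toList).map
            (fun xc => ((xc.1, yl.1), xc.2)))).reverse.find?
          (fun p => p.1 == ((x, y) : Int × Int)) with _ | q
      · rw [hf]; rfl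
      · exfalso
        have hq1 : q.1 = (x, y) := by simpa using List.find?_some hf
        have hqm : (q.1, q.2) ∈ (PySem.List.enumerate lines).flatMap (fun yl =>
            (PySem.List.enumerate yl.2.toList).map (fun xc => ((xc.1, yl.1), xc.2))) := by
          simpa using List.mem_reverse.mp (List.mem_of_find?_eq_some hf)
        have := (hFLAT q.1 q.2).mp hqm
        rw [hq1] at this
        simp only at this
        rw [this] at hc
        exact Option.some_ne_none _ hc
    · rcases hf : ((PySem.List.enumerate lines).flatMap (fun yl =>
          (PySem.List.enumerate yl.2.toList).map
            (fun xc => ((xc.1, yl.1), xc.2)))).reverse.find?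
          (fun p => p.1 == ((x, y) : Int × Int)) with _ | q
      · exfalso
        have hm : (((x, y) : Int × Int), c) ∈ (PySem.List.enumerate lines).flatMap (fun yl =>
            (PySem.List.enumerate yl.2.toList).map (fun xc => ((xc.1, yl.1), xc.2))) :=
          (hFLAT (x, y) c).mpr (by simpa using hc)
        rw [List.find?_eq_none] at hf
        have := hf _ (List.mem_reverse.mpr hm)
        simp at this
      · have hq1 : q.1 = (x, y) := by simpa using List.find?_some hf
        have hqm : (q.1, q.2) ∈ (PySem.List.enumerate lines).flatMap (fun yl =>
            (PySem.List.enumerate yl.2.toList).map (fun xc => ((xc.1, yl.1), xc.2))) := by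
          simpa using List.mem_reverse.mp (List.mem_of_find?_eq_some hf)
        have hv := (hFLAT q.1 q.2).mp hqm
        rw [hq1] at hv
        simp only at hv
        rw [hv] at hc
        rw [hf]
        exact hc
  refine ⟨⟨hnd, ?_⟩, hrect⟩
  intro x y
  by_cases hin : 0 ≤ x ∧ x < ((lines.headD "").toList.length : Int) ∧
      0 ≤ y ∧ y < (lines.length : Int)
  · rw [if_pos hin, hfull x y]
    -- in the box the full grid and the truncated grid agree
    have hyb : y.toNat < lines.length := by omega
    have hrowfull : (lines.map String.toList)[y.toNat]'(by simpa using hyb) =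
        lines[y.toNat].toList := by simp
    have hrowtr : (lines.map (fun l => l.toList.take
        (lines.headD "").toList.length))[y.toNat]'(by simpa using hyb) =
        lines[y.toNat].toList.take (lines.headD "").toList.length := by simp
    have hxlt : x.toNat < (lines.headD "").toList.length := by omega
    have hxfull : x.toNat < lines[y.toNat].toList.length := by
      have := hrows _ (List.getElem_mem hyb)
      omega
    unfold cellO
    rw [if_pos (show (0 : Int) ≤ x ∧ 0 ≤ y by omega),
      if_pos (show (0 : Int) ≤ x ∧ 0 ≤ y by omega),
      List.getElem?_eq_getElem (by simpa using hyb),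
      List.getElem?_eq_getElem (by simpa using hyb)]
    simp only [Option.bind_some, hrowfull, hrowtr]
    rw [List.getElem?_eq_getElem hxfull,
      List.getElem?_eq_getElem (by rw [List.length_take]; omega)]
    congr 1
    exact (List.getElem_take).symm
  · rw [if_neg hin]

theorem loopA_succ (f : Nat) (i H W : Int) (states : List (PySem.Dict (Int × Int) Char))
    (grid : PySem.Dict (Int × Int) Char) :
    loopA (f + 1) i H W states grid =
      (match indexA (cycleA H W grid) states with
       | some j =>
           getLoadA (PySem.List.pyGetD states (PySem.Int.mod (1000000000 - j) (i - j) + j)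
             PySem.Dict.empty) H W
       | none => loopA f (i + 1) H W (states ++ [cycleA H W grid]) (cycleA H W grid)) := rfl

theorem loopP_succ (f : Nat) (i : Int) (seen : PySem.Dict (List (List Char)) Int)
    (g g0 : List (List Char)) (H : Int) :
    loopP (f + 1) i seen g g0 H =
      (match seen.get? g with
       | some j =>
           loadP H ((PySem.List.pyRange 0 (PySem.Int.mod (1000000000 - j) (i - j) + j)).foldl
             (fun g _ => spinP g) g0)
       | none => loopP f (i + 1) (seen.insert g i) (spinP g) g0 H) := rfl

theorem part_2_spec_pos {lines : List String} (hp : Pre_part_2 lines)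
    (hW : 0 < (lines.headD "").toList.length) : part_2 lines = part_2_alt lines := by
  have hH : 0 < lines.length := by
    cases lines with
    | nil => exact absurd rfl hp.1
    | cons a t => simp
  have hWv : PySem.Str.len (PySem.List.pyGetD lines 0 "") =
      (((lines.headD "").toList.length : Nat) : Int) := by
    cases lines with
    | nil => exact absurd rfl hp.1
    | cons a t =>
      rw [show PySem.List.pyGetD (a :: t) 0 "" = a from by
        rw [PySem.List.pyGetD_eq_getElem _ _ (by norm_num) (by simp)]
        simp]
      rw [PySem.Str.len_eq]
      simp
  obtain ⟨hinv0, hrect0⟩ := init_spec hp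
  simp only [part_2, part_2_alt]
  rw [hWv]
  rw [show lines.map (fun line => PySem.List.slice line.toList none
        (some (((lines.headD "").toList.length : Nat) : Int))) =
      lines.map (fun l => l.toList.take (lines.headD "").toList.length) from
    List.map_congr_left (fun l _ => PySem.List.slice_to_natCast _ _)]
  rw [show (1000000001 : Nat) = 1000000000 + 1 from rfl, loopP_succ,
    PySem.Dict.get?_empty]
  simp only
  rw [spinP_eq, show (0 : Int) + 1 = ((1 : Nat) : Int) from by norm_num,
    show (lines.length : Int) = ((lines.length : Nat) : Int) from rfl]
  apply loop_corr hH hW _ (lines.map (fun l => l.toList.take (lines.headD "").toList.length))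
    1000000000 1 le_rfl
  · simp only [List.range_one, List.map_cons, List.map_nil, Function.iterate_zero_apply]
    exact List.forall₂_cons.mpr ⟨⟨hinv0, hrect0⟩, List.Forall₂.nil⟩
  · exact hinv0
  · exact hrect0
  · simp
  · rw [PySem.Dict.items_insert_of_not_contains _ _ (PySem.Dict.contains_empty _)]
    rw [show (PySem.Dict.empty : PySem.Dict (List (List Char)) Int).items = [] from rfl]
    simp [PySem.List.enumerate_cons, PySem.List.enumerate_nil]

theorem rotate_items (d : PySem.Dict (Int × Int) Char) (hnd : d.keys.Nodup) (Hp : Int) :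
    (rotateA d Hp).items = d.items.map (fun p => ((Hp - p.1.2 - 1, p.1.1), p.2)) := by
  have hkey : (d.items.map (fun q : (Int × Int) × Char => (Hp - q.1.2 - 1, q.1.1))).Nodup := by
    have h1 : d.items.map (fun q : (Int × Int) × Char => (Hp - q.1.2 - 1, q.1.1)) =
        (d.items.map (·.1)).map (fun k : Int × Int => (Hp - k.2 - 1, k.1)) := by
      rw [List.map_map]
      rfl
    rw [h1]
    apply List.Nodup.map _ hnd
    intro a b hab
    rw [Prod.mk.injEq] at hab
    rw [Prod.ext_iff]
    exact ⟨hab.2, by omega⟩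
  have := PySem.Dict.items_foldl_insert_fresh
    (l := d.items) (k := fun q : (Int × Int) × Char => (Hp - q.1.2 - 1, q.1.1))
    (v := fun q : (Int × Int) × Char => q.2) (d := PySem.Dict.empty)
    (fun a _ => PySem.Dict.contains_empty _) hkey
  simpa [rotateA] using this

theorem rot4_id (d : PySem.Dict (Int × Int) Char) (hnd : d.keys.Nodup) (H W : Int) :
    rotateA (rotateA (rotateA (rotateA d H) W) H) W = d := by
  have h1 := (rotate_spec hnd H).1
  have h2 := (rotate_spec h1 W).1
  have h3 := (rotate_spec h2 H).1
  apply PySem.Dict.ext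
  rw [rotate_items _ h3 W, rotate_items _ h2 H, rotate_items _ h1 W, rotate_items _ hnd H]
  rw [List.map_map, List.map_map, List.map_map]
  conv_rhs => rw [← List.map_id d.items]
  apply List.map_congr_left
  intro p _
  obtain ⟨⟨x, y⟩, c⟩ := p
  simp only [Function.comp_apply, id]
  rw [Prod.mk.injEq, Prod.ext_iff]
  refine ⟨⟨by ring, by ring⟩, rfl⟩

theorem pyDictEq_refl (d : PySem.Dict (Int × Int) Char) (hnd : d.keys.Nodup) :
    pyDictEqA d d = true := by
  rw [pyDictEqA, Bool.and_eq_true, List.all_eq_true]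
  refine ⟨by simp, ?_⟩
  intro p hp
  rw [PySem.Dict.get?_of_mem_items d (by simpa using hp) hnd]
  simp

theorem part_2_spec_zero {lines : List String} (hp : Pre_part_2 lines)
    (hW0 : (lines.headD "").toList.length = 0) : part_2 lines = part_2_alt lines := by
  have hne := hp.1
  have hWv : PySem.Str.len (PySem.List.pyGetD lines 0 "") = ((0 : Nat) : Int) := by
    cases lines with
    | nil => exact absurd rfl hne
    | cons a t =>
      rw [show PySem.List.pyGetD (a :: t) 0 "" = a from by
        rw [PySem.List.pyGetD_eq_getElem _ _ (by norm_num) (by simp)]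
        simp]
      rw [PySem.Str.len_eq]
      have : a.toList.length = 0 := by simpa using hW0
      rw [this]
  obtain ⟨hinv0, _⟩ := init_spec hp
  have hnd0 := hinv0.1
  simp only [part_2, part_2_alt]
  rw [hWv]
  have hg0 : lines.map (fun line => PySem.List.slice line.toList none (some ((0 : Nat) : Int)))
      = lines.map (fun _ => ([] : List Char)) := by
    apply List.map_congr_left
    intro l _
    rw [PySem.List.slice_to_natCast]
    rfl
  rw [hg0]
  -- the A-side grid dict (with its phantom cells) is a fixed point of the spin cycle
  set d0 := (PySem.List.enumerate lines).foldl
    (fun d yl =>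
      (PySem.List.enumerate yl.2.toList).foldl (fun d xc => d.insert (xc.1, yl.1) xc.2) d)
    PySem.Dict.empty with hd0
  have hrollW0 : ∀ (d : PySem.Dict (Int × Int) Char) (H : Int),
      rollA d H ((0 : Nat) : Int) = d := by
    intro d H
    unfold rollA
    rw [show PySem.List.pyRange 0 (((0 : Nat) : Int)) = [] from rfl]
    rfl
  have hroll0 : ∀ (d : PySem.Dict (Int × Int) Char) (W' : Int),
      rollA d ((0 : Nat) : Int) W' = d := by
    intro d W'
    unfold rollA
    rw [PySem.List.foldl_congr_mem _ _ (fun t _ => t) _ ?_]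
    · exact PySem.List.foldl_ignore _ _
    · intro acc x _
      rw [show PySem.List.pyRange 0 (((0 : Nat) : Int)) = [] from rfl]
      rfl
  have hcyc : cycleA ((lines.length : Nat) : Int) ((0 : Nat) : Int) d0 = d0 := by
    unfold cycleA
    rw [hrollW0, hroll0, hrollW0, hroll0]
    exact rot4_id d0 hnd0 _ _
  have hA : loopA 1000000000 1 ((lines.length : Nat) : Int) ((0 : Nat) : Int) [d0] d0 = 0 := by
    rw [show (1000000000 : Nat) = 999999999 + 1 from by norm_num, loopA_succ, hcyc]
    rw [show indexA d0 [d0] = some 0 from by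
      simp [indexA, pyDictEq_refl d0 hnd0]]
    simp only
    rw [show PySem.Int.mod (1000000000 - 0) (1 - 0) + 0 = 0 from by
      rw [PySem.Int.mod_eq_emod_of_pos (by norm_num)]
      norm_num]
    rw [show PySem.List.pyGetD [d0] 0 PySem.Dict.empty = d0 from
      PySem.List.pyGetD_zero_cons _ _ _]
    unfold getLoadA
    rw [show PySem.List.pyRange 0 (((0 : Nat) : Int)) = [] from rfl]
    rfl
  -- the B side: the first spin empties the grid, the second repeats it
  have hgne : lines.map (fun _ => ([] : List Char)) ≠ [] := by
    cases lines with
    | nil => exact absurd rfl hne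
    | cons a t => simp
  have hstep0 : stepB (lines.map (fun _ => ([] : List Char))) = [] := by
    cases lines with
    | nil => exact absurd rfl hne
    | cons a t =>
      unfold stepB zipStarB
      simp only [List.map_cons, List.headD_cons]
      rfl
  have hcycB : cycleB (lines.map (fun _ => ([] : List Char))) = [] := by
    unfold cycleB
    rw [hstep0]
    rfl
  have hcycnil : cycleB ([] : List (List Char)) = [] := rfl
  have hB1 : loopP 1000000001 0 PySem.Dict.empty (lines.map (fun _ => ([] : List Char)))
      (lines.map (fun _ => ([] : List Char))) ((lines.length : Nat) : Int) =
      loopP 1000000000 1 (PySem.Dict.empty.insert (lines.map (fun _ => ([] : List Char))) 0)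
        [] (lines.map (fun _ => ([] : List Char))) ((lines.length : Nat) : Int) := by
    rw [show (1000000001 : Nat) = 1000000000 + 1 from rfl, loopP_succ,
      PySem.Dict.get?_empty]
    simp only
    rw [spinP_eq, hcycB]
    norm_num
  have hB2 : loopP 1000000000 1
      (PySem.Dict.empty.insert (lines.map (fun _ => ([] : List Char))) 0) []
      (lines.map (fun _ => ([] : List Char))) ((lines.length : Nat) : Int) =
      loopP 999999999 2 ((PySem.Dict.empty.insert
          (lines.map (fun _ => ([] : List Char))) 0).insert [] 1)
        [] (lines.map (fun _ => ([] : List Char))) ((lines.length : Nat) : Int) := by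
    rw [show (1000000000 : Nat) = 999999999 + 1 from rfl, loopP_succ,
      PySem.Dict.get?_insert_of_ne _ _ (fun hc => hgne hc.symm), PySem.Dict.get?_empty]
    simp only
    rw [spinP_eq, hcycnil]
    norm_num
  have hmod : PySem.Int.mod (1000000000 - 1) (2 - 1) + 1 = 1 := by
    rw [show (2 : Int) - 1 = 1 from by norm_num,
      PySem.Int.mod_eq_emod_of_pos (by norm_num)]
    norm_num
  have hB3 : loopP 999999999 2 ((PySem.Dict.empty.insert
        (lines.map (fun _ => ([] : List Char))) 0).insert [] 1)
      [] (lines.map (fun _ => ([] : List Char))) ((lines.length : Nat) : Int) = 0 := by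
    rw [show (999999999 : Nat) = 999999998 + 1 from rfl, loopP_succ,
      PySem.Dict.get?_insert_self]
    simp only
    rw [hmod, show PySem.List.pyRange 0 1 = [0] from by decide, List.foldl_cons,
      List.foldl_nil, spinP_eq, hcycB]
    rfl
  rw [hA, hB1, hB2, hB3]

-- ===== VERDICT (by name: the statement is the Claim_ definition above) =====
theorem part_2_spec : Claim_equal_part_2 := by
  intro lines _ hp
  unfold Spec_part_2
  rcases Nat.eq_zero_or_pos (lines.headD "").toList.length with h | h
  · exact part_2_spec_zero hp h
  · exact part_2_spec_pos hp h
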